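-- pv_equiv track=rewrite | github.com/AFSD-Gurza-Giulia/Proiecte-facultate-personal | Laborator 3.py | calculeaza_rest_optim
-- ===== SOURCE A (Python) =====
-- def calculeaza_rest_optim(rest, bancnote):
--
--     inf = float('inf')
--     dp = [inf] * (rest + 1)
--     dp[0] = 0
--     bancnote_folosite = [0] * (rest + 1)
--
--     bancnote_sortate = sorted(bancnote, key=lambda x: x['valoare'], reverse=True)
--
--     for i in range(1, rest + 1):
--         for bancnota in bancnote_sortate:
--             valoare = bancnota['valoare']
--             stoc = bancnota['stoc']
--
--             if valoare <= i and stoc > 0 and dp[i - valoare] != inf and dp[i - valoare] + 1 < dp[i]: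
--                 dp[i] = dp[i - valoare] + 1
--                 bancnote_folosite[i] = valoare
--
--     if dp[rest] == inf:
--         return None
--
--     solutie = []
--     suma_ramasa = rest
--
--     while suma_ramasa > 0:
--         bancnota_folosita = bancnote_folosite[suma_ramasa]
--         solutie.append(bancnota_folosita)
--         suma_ramasa -= bancnota_folosita
--
--     numarare_bancnote = {}
--     for b in solutie:
--         if b not in numarare_bancnote:
--             numarare_bancnote[b] = 0
--         numarare_bancnote[b] += 1
--
--     for valoare, cantitate in numarare_bancnote.items():
--         gasit = False
--         for bancnota in bancnote:
--             if bancnota['valoare'] == valoare: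
--                 if bancnota['stoc'] < cantitate:
--                     return None
--                 gasit = True
--                 break
--         if not gasit:
--             return None
--
--     return solutie
-- ===== SOURCE B (Python) =====
-- def calculeaza_rest_optim(rest, bancnote):
--     # distinct positive in-stock denominations, largest first (largest wins discovery ties)
--     vals = []
--     for b in sorted(bancnote, key=lambda x: x['valoare'], reverse=True):
--         v = b['valoare']
--         if v >= 1 and b['stoc'] > 0 and v not in vals:
--             vals.append(v)
--
--     # BFS over amounts: layer m = amounts payable with m banknotes; record the
--     # banknote used at first discovery (scanning vals descending, so largest claims ties)
--     choice = {0: 0}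
--     frontier = [0]
--     while frontier:
--         new = []
--         for v in vals:
--             for j in frontier:
--                 i = j + v
--                 if i <= rest and i not in choice:
--                     choice[i] = v
--                     new.append(i)
--         frontier = new
--
--     if rest not in choice:
--         return None
--
--     solutie = []
--     i = rest
--     while i > 0:
--         v = choice[i]
--         solutie.append(v)
--         i -= v
--
--     for v in set(solutie):
--         b = next((x for x in bancnote if x['valoare'] == v), None)
--         if b is None or b['stoc'] < solutie.count(v):
--             return None
--     return solutie
-- ===== Notes on version B (the rewrite author's own statement) =====
-- stated objective: alternative
-- what changed: B replaces A's bottom-up dp-over-amounts array sweep by a breadth-first search over reachable amounts in layers (layer m = amounts payable with m banknotes), recording at first discovery the banknote used (scanning distinct in-stock denominations descending so the largest claims ties, matching A's strict-improvement tie-break), then follows the recorded choices back and validates each distinct used value with a first-match lookup and solutie.count instead of A's counting dict plus flag-and-break nested scan.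
-- outside the precondition, e.g. on calculeaza_rest_optim(0, [{'valoare': 1}]): A returns [], B raises KeyError
import Mathlib
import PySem

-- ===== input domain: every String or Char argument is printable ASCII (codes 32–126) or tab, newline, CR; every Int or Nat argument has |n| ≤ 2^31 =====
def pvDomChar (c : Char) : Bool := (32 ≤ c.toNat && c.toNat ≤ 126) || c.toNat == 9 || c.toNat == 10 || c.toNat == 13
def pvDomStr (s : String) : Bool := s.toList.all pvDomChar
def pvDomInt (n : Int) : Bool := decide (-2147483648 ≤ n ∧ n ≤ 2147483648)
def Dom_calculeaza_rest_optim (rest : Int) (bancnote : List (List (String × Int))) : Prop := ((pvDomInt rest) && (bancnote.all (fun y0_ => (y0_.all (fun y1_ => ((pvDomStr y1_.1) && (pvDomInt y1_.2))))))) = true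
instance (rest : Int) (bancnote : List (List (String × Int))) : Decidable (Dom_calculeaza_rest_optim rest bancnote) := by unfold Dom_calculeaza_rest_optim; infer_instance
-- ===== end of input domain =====

-- B replaces A's bottom-up dp sweep over amounts by a breadth-first search in layers
-- (layer m = amounts payable with m banknotes), recording the banknote used at first
-- discovery; same return value (objective: alternative).

-- ===== PORT A =====
-- b['valoare'] / b['stoc'] (first-match dict lookup; KeyError excluded by Pre_)
def pvVal (b : List (String × Int)) : Int := ((PySem.Dict.mk b).get? "valoare").getD 0
def pvStoc (b : List (String × Int)) : Int := ((PySem.Dict.mk b).get? "stoc").getD 0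

-- dp entries are `Option Int`: `none` is A's float('inf'); this is `dp[i-valoare] + 1 < dp[i]`
def pvLtInf (x : Int) (cur : Option Int) : Bool :=
  match cur with
  | none => true
  | some y => decide (x < y)

-- the body of A's inner `for bancnota in bancnote_sortate` loop at amount i
def pvStepA (i : Int) (st : List (Option Int) × List Int) (b : List (String × Int)) :
    List (Option Int) × List Int :=
  let valoare := pvVal b
  let stoc := pvStoc b
  if valoare ≤ i ∧ 0 < stoc then
    match PySem.List.pyGetD st.1 (i - valoare) none with  -- dp[i - valoare]; in range under Pre_
    | some c =>
      if pvLtInf (c + 1) (PySem.List.pyGetD st.1 i none) then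
        (PySem.List.pySetD st.1 i (some (c + 1)), PySem.List.pySetD st.2 i valoare)
      else st
    | none => st
  else st

-- `while suma_ramasa > 0`; fuel rest+1 suffices under Pre_ (each step subtracts a value ≥ 1)
def pvReconA : Nat → List Int → Int → List Int → List Int
  | 0, _, _, acc => acc
  | fuel+1, fol, suma, acc =>
    if 0 < suma then
      let v := PySem.List.pyGetD fol suma 0
      pvReconA fuel fol (suma - v) (acc ++ [v])
    else acc

-- A's validation: outer loop over numarare.items(), inner `for bancnota in bancnote` with break
def pvCheckA : List (Int × Int) → List (List (String × Int)) → Bool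
  | [], _ => true
  | (valoare, cant) :: items, bancnote =>
    match bancnote.find? (fun b => pvVal b == valoare) with  -- inner for + break: first match
    | some b => if pvStoc b < cant then false else pvCheckA items bancnote
    | none => false  -- gasit stays False

def calculeaza_rest_optim (rest : Int) (bancnote : List (List (String × Int))) : Option (List Int) :=
  let dp0 : List (Option Int) :=
    PySem.List.pySetD (List.replicate (rest + 1).toNat (none : Option Int)) 0 (some 0)
  let fol0 : List Int := List.replicate (rest + 1).toNat 0
  let sortate := PySem.List.sorted bancnote (fun x => pvVal x) true
  let st := (PySem.List.pyRange 1 (rest + 1) 1).foldl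
      (fun st i => sortate.foldl (pvStepA i) st) (dp0, fol0)
  match PySem.List.pyGetD st.1 rest none with
  | none => none
  | some _ =>
    let solutie := pvReconA (rest.toNat + 1) st.2 rest []
    let numarare := solutie.foldl (fun d v =>
      let d' := if d.contains v then d else d.insert v 0
      d'.insert v (d'.getD v 0 + 1)) (PySem.Dict.empty : PySem.Dict Int Int)
    if pvCheckA numarare.items bancnote then some solutie else none

-- ===== PORT B =====
-- distinct positive in-stock denominations, largest first
def pvValsB (bancnote : List (List (String × Int))) : List Int :=
  (PySem.List.sorted bancnote (fun x => pvVal x) true).foldl (fun vs b =>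
    if 1 ≤ pvVal b ∧ 0 < pvStoc b ∧ pvVal b ∉ vs then vs ++ [pvVal b] else vs) []

-- one denomination's pass of a BFS layer: `for j in frontier: i = j + v; if i <= rest and i not in choice: …`
def pvExpand (rest : Int) (frontier : List Int) (st : PySem.Dict Int Int × List Int)
    (v : Int) : PySem.Dict Int Int × List Int :=
  frontier.foldl (fun st j =>
    if j + v ≤ rest ∧ ¬ st.1.contains (j + v) then
      (st.1.insert (j + v) v, st.2 ++ [j + v])
    else st) st

-- `while frontier:` — fuel rest+2 suffices: each nonempty layer discovers a fresh amount in [0, rest]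
def pvBFS : Nat → Int → List Int → PySem.Dict Int Int → List Int → PySem.Dict Int Int
  | 0, _, _, choice, _ => choice
  | fuel+1, rest, vals, choice, frontier =>
    if frontier.isEmpty then choice
    else
      let st := vals.foldl (pvExpand rest frontier) (choice, ([] : List Int))
      pvBFS fuel rest vals st.1 st.2

-- `while i > 0`; Python's choice[i] — the key is always present on the followed path
def pvReconAlt : Nat → PySem.Dict Int Int → Int → List Int → List Int
  | 0, _, _, acc => acc
  | fuel+1, choice, i, acc =>
    if 0 < i then
      let v := choice.getD i 0
      pvReconAlt fuel choice (i - v) (acc ++ [v])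
    else acc

def calculeaza_rest_optim_alt (rest : Int) (bancnote : List (List (String × Int))) : Option (List Int) :=
  let vals := pvValsB bancnote
  let choice := pvBFS (rest.toNat + 2) rest vals (PySem.Dict.mk [((0 : Int), (0 : Int))]) [0]
  if choice.contains rest then
    let solutie := pvReconAlt (rest.toNat + 1) choice rest []
    if (PySem.Set.ofList solutie).all (fun v =>
        match bancnote.find? (fun x => pvVal x == v) with  -- next((first match), None)
        | some b => !(pvStoc b < (PySem.List.count solutie v : Int))
        | none => false) then some solutie else none
  else none

-- ===== PRECONDITION & SPEC =====
-- Pre_ excludes the inputs where A raises (negative rest → IndexError; a banknote without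
-- 'valoare' → KeyError; with rest ≥ 1 a banknote without 'stoc' → KeyError, and a
-- negative-value banknote with positive stock → IndexError) and two corners A happens to
-- return on: a banknote without a 'stoc' key when rest = 0 (A never reads it there, B does)
-- and association lists with duplicate keys, which no Python dict input can carry (the
-- first-match reading is fixed only by the encoding).
def Pre_calculeaza_rest_optim (rest : Int) (bancnote : List (List (String × Int))) : Prop :=
  0 ≤ rest ∧ ∀ b ∈ bancnote,
    (b.map Prod.fst).Nodup ∧
    ((PySem.Dict.mk b).get? "valoare").isSome = true ∧
    ((PySem.Dict.mk b).get? "stoc").isSome = true ∧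
    (1 ≤ rest → (0 ≤ pvVal b ∨ pvStoc b ≤ 0))
instance (rest : Int) (bancnote : List (List (String × Int))) :
    Decidable (Pre_calculeaza_rest_optim rest bancnote) := by
  unfold Pre_calculeaza_rest_optim; infer_instance

def pvWitness_calculeaza_rest_optim : Int × (List (List (String × Int))) :=
  (5, [[("valoare", 2), ("stoc", 3)], [("valoare", 3), ("stoc", 1)]])

def Spec_calculeaza_rest_optim (rest : Int) (bancnote : List (List (String × Int)))
    (out : Option (List Int)) : Prop := out = calculeaza_rest_optim_alt rest bancnote
instance (rest : Int) (bancnote : List (List (String × Int))) (out : Option (List Int)) :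
    Decidable (Spec_calculeaza_rest_optim rest bancnote out) := by
  unfold Spec_calculeaza_rest_optim; infer_instance

-- ===== CLAIM (what is proved, stated in full; the proofs are below) =====
def Claim_equal_calculeaza_rest_optim : Prop :=
  ∀ (rest : Int) (bancnote : List (List (String × Int))),
    Dom_calculeaza_rest_optim rest bancnote → Pre_calculeaza_rest_optim rest bancnote →
    Spec_calculeaza_rest_optim rest bancnote (calculeaza_rest_optim rest bancnote)

-- ===== LEMMAS AND PROOFS =====

def pvCur (o : Option (Int × Int)) : Option Int := o.map Prod.fst
def pvChoice (o : Option (Int × Int)) : Int := (o.map Prod.snd).getD 0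

-- the abstract strict-improvement step of the min-count recurrence, reading a dp list
def pvStepB (dp : List (Option (Int × Int))) (i : Int) (best : Option (Int × Int)) (v : Int) :
    Option (Int × Int) :=
  if v ≤ i then
    match PySem.List.pyGetD dp (i - v) none with
    | some p =>
      match best with
      | none => some (p.1 + 1, v)
      | some q => if p.1 + 1 < q.1 then some (p.1 + 1, v) else best
    | none => best
  else best

def pvBest (dp : List (Option (Int × Int))) (i : Int) (vals : List Int) : Option (Int × Int) :=
  vals.foldl (pvStepB dp i) none

-- the state relation while A is at amount i, against a reference dp list plus running `best`
def pvRelMid (dpA : List (Option Int)) (folA : List Int) (dpB : List (Option (Int × Int)))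
    (i : Int) (best : Option (Int × Int)) (N : Nat) : Prop :=
  dpA.length = N ∧ folA.length = N ∧
  ∀ j : Int, 0 ≤ j → j < (N : Int) →
    PySem.List.pyGetD dpA j none =
      (if j = i then pvCur best else pvCur (PySem.List.pyGetD dpB j none)) ∧
    PySem.List.pyGetD folA j 0 =
      (if j = i then pvChoice best else pvChoice (PySem.List.pyGetD dpB j none))

-- the state relation between completed rounds
def pvRel (dpA : List (Option Int)) (folA : List Int) (dpB : List (Option (Int × Int)))
    (N : Nat) : Prop :=
  dpA.length = N ∧ folA.length = N ∧
  ∀ j : Int, 0 ≤ j → j < (N : Int) →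
    PySem.List.pyGetD dpA j none = pvCur (PySem.List.pyGetD dpB j none) ∧
    PySem.List.pyGetD folA j 0 = pvChoice (PySem.List.pyGetD dpB j none)

def pvBelow (b₂ b : Option (Int × Int)) : Prop :=
  ∀ y, b = some y → ∃ y₂, b₂ = some y₂ ∧ y₂.1 ≤ y.1

def pvSat (dp : List (Option (Int × Int))) (i : Int) (vs : List Int)
    (best : Option (Int × Int)) : Prop := ∀ v ∈ vs, pvStepB dp i best v = best

-- B's vals list as built from the not-yet-scanned suffix l, given already collected vs
def pvNewVals : List (List (String × Int)) → List Int → List Int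
  | [], _ => []
  | b :: l, vs =>
    if 1 ≤ pvVal b ∧ 0 < pvStoc b ∧ pvVal b ∉ vs then
      pvVal b :: pvNewVals l (vs ++ [pvVal b])
    else pvNewVals l vs

lemma pvBelow_step (dp : List (Option (Int × Int))) (i : Int) (b : Option (Int × Int)) (v : Int) :
    pvBelow (pvStepB dp i b v) b := by
  intro y hy
  subst hy
  simp only [pvStepB]
  split
  · cases h : PySem.List.pyGetD dp (i - v) none with
    | none => exact ⟨y, rfl, le_refl _⟩
    | some p =>
      by_cases hlt : p.1 + 1 < y.1
      · exact ⟨(p.1 + 1, v), by simp [hlt], le_of_lt hlt⟩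
      · exact ⟨y, by simp [hlt], le_refl _⟩
  · exact ⟨y, rfl, le_refl _⟩

lemma pvStepB_noop_mono (dp : List (Option (Int × Int))) (i : Int)
    (b b₂ : Option (Int × Int)) (v : Int) (h : pvStepB dp i b v = b) (hle : pvBelow b₂ b) :
    pvStepB dp i b₂ v = b₂ := by
  simp only [pvStepB] at h ⊢
  by_cases hvi : v ≤ i
  · rw [if_pos hvi] at h ⊢
    cases hg : PySem.List.pyGetD dp (i - v) none with
    | none => rfl
    | some p =>
      rw [hg] at h
      cases b with
      | none => simp at h
      | some q =>
        obtain ⟨y₂, hy₂, hle⟩ := hle q rfl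
        subst hy₂
        by_cases hq : p.1 + 1 < q.1
        · simp only [hq, if_true] at h
          rw [show q = (p.1 + 1, v) by simpa using h.symm] at hq
          simp at hq
        · have hny : ¬ p.1 + 1 < y₂.1 := by omega
          simp [hny]
  · rw [if_neg hvi]

lemma pvStepB_idem (dp : List (Option (Int × Int))) (i : Int) (b : Option (Int × Int)) (v : Int) :
    pvStepB dp i (pvStepB dp i b v) v = pvStepB dp i b v := by
  by_cases hvi : v ≤ i
  · cases hg : PySem.List.pyGetD dp (i - v) none with
    | none => simp only [pvStepB, hg, if_pos hvi]
    | some p =>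
      cases b with
      | none => simp [pvStepB, hg, hvi]
      | some q =>
        by_cases hq : p.1 + 1 < q.1
        · simp [pvStepB, hg, hvi, hq]
        · simp [pvStepB, hg, hvi, hq]
  · simp [pvStepB, hvi]

lemma pvRelMid_update (N : Nat) (dpB : List (Option (Int × Int))) (i : Int)
    (best : Option (Int × Int)) (dpA : List (Option Int)) (folA : List Int)
    (hrel : pvRelMid dpA folA dpB i best N) (hi0 : 0 ≤ i) (_hiN : i < (N : Int)) (c v : Int) :
    pvRelMid (PySem.List.pySetD dpA i (some c)) (PySem.List.pySetD folA i v) dpB i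
      (some (c, v)) N := by
  obtain ⟨hA, hF, hread⟩ := hrel
  refine ⟨by rw [PySem.List.length_pySetD, hA], by rw [PySem.List.length_pySetD, hF], ?_⟩
  intro j hj0 hjN
  rw [PySem.List.pySetD_of_nonneg dpA (some c) hi0, PySem.List.pySetD_of_nonneg folA v hi0]
  have hsetA : PySem.List.pyGetD (dpA.set i.toNat (some c)) j none =
      if j = i then some c else PySem.List.pyGetD dpA j none := by
    rw [PySem.List.pyGetD_eq_getElem _ none hj0
      (by rw [List.length_set, hA]; exact hjN)]
    rw [List.getElem_set]
    by_cases hji : j = i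
    · rw [if_pos (by omega), if_pos hji]
    · rw [if_neg (by omega), if_neg hji,
        PySem.List.pyGetD_eq_getElem dpA none hj0 (by rw [hA]; exact hjN)]
  have hsetF : PySem.List.pyGetD (folA.set i.toNat v) j 0 =
      if j = i then v else PySem.List.pyGetD folA j 0 := by
    rw [PySem.List.pyGetD_eq_getElem _ 0 hj0
      (by rw [List.length_set, hF]; exact hjN)]
    rw [List.getElem_set]
    by_cases hji : j = i
    · rw [if_pos (by omega), if_pos hji]
    · rw [if_neg (by omega), if_neg hji,
        PySem.List.pyGetD_eq_getElem folA 0 hj0 (by rw [hF]; exact hjN)]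
  constructor
  · rw [hsetA]
    by_cases hji : j = i
    · rw [if_pos hji, if_pos hji]; rfl
    · rw [if_neg hji, if_neg hji]
      exact ((hread j hj0 hjN).1).trans (by rw [if_neg hji])
  · rw [hsetF]
    by_cases hji : j = i
    · rw [if_pos hji, if_pos hji]; rfl
    · rw [if_neg hji, if_neg hji]
      exact ((hread j hj0 hjN).2).trans (by rw [if_neg hji])

lemma pvStepA_rel (N : Nat) (dpB : List (Option (Int × Int))) (i : Int)
    (best : Option (Int × Int)) (dpA : List (Option Int)) (folA : List Int)
    (b : List (String × Int)) (hi1 : 1 ≤ i) (hiN : i < (N : Int))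
    (hlen : (dpB.length : Int) = i) (hb : pvVal b < 0 → pvStoc b ≤ 0)
    (hrel : pvRelMid dpA folA dpB i best N) :
    pvRelMid (pvStepA i (dpA, folA) b).1 (pvStepA i (dpA, folA) b).2 dpB i
      (if 1 ≤ pvVal b ∧ 0 < pvStoc b then pvStepB dpB i best (pvVal b) else best) N := by
  have hread := hrel.2.2
  by_cases hs0 : 0 < pvStoc b
  case neg =>
    rw [if_neg (by tauto)]
    have hnoopA : pvStepA i (dpA, folA) b = (dpA, folA) := by
      simp only [pvStepA]
      rw [if_neg (by tauto)]
    rw [hnoopA]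
    exact hrel
  case pos =>
    have hv0 : 0 ≤ pvVal b := by
      by_contra hneg
      have := hb (by omega)
      omega
    by_cases hv1 : 1 ≤ pvVal b
    · rw [if_pos ⟨hv1, hs0⟩]
      by_cases hvi : pvVal b ≤ i
      · have hj := hread (i - pvVal b) (by omega) (by omega)
        have hne : ¬ (i - pvVal b = i) := by omega
        rw [if_neg hne] at hj
        have hii := hread i (by omega) hiN
        rw [if_pos rfl] at hii
        cases hgB : PySem.List.pyGetD dpB (i - pvVal b) none with
        | none =>
          have hgA : PySem.List.pyGetD dpA (i - pvVal b) none = none := by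
            rw [hj.1, hgB]; rfl
          have hnoopA : pvStepA i (dpA, folA) b = (dpA, folA) := by
            simp only [pvStepA]
            rw [if_pos ⟨hvi, hs0⟩]
            simp [hgA]
          have hnoopB : pvStepB dpB i best (pvVal b) = best := by
            simp [pvStepB, hvi, hgB]
          rw [hnoopA, hnoopB]
          exact hrel
        | some p =>
          have hgA : PySem.List.pyGetD dpA (i - pvVal b) none = some p.1 := by
            rw [hj.1, hgB]; rfl
          cases hbst : best with
          | none =>
            have hcur : PySem.List.pyGetD dpA i none = none := by rw [hii.1, hbst]; rfl
            have hA' : pvStepA i (dpA, folA) b =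
                (PySem.List.pySetD dpA i (some (p.1 + 1)),
                 PySem.List.pySetD folA i (pvVal b)) := by
              simp only [pvStepA]
              rw [if_pos ⟨hvi, hs0⟩]
              simp [hgA, hcur, pvLtInf]
            have hstepB : pvStepB dpB i none (pvVal b) = some (p.1 + 1, pvVal b) := by
              simp [pvStepB, hvi, hgB]
            rw [hA', hstepB]
            exact pvRelMid_update N dpB i none dpA folA (hbst ▸ hrel)
              (by omega) hiN (p.1 + 1) (pvVal b)
          | some q =>
            have hcur : PySem.List.pyGetD dpA i none = some q.1 := by rw [hii.1, hbst]; rfl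
            by_cases hlt : p.1 + 1 < q.1
            · have hA' : pvStepA i (dpA, folA) b =
                  (PySem.List.pySetD dpA i (some (p.1 + 1)),
                   PySem.List.pySetD folA i (pvVal b)) := by
                simp only [pvStepA]
                rw [if_pos ⟨hvi, hs0⟩]
                simp [hgA, hcur, pvLtInf, hlt]
              have hstepB : pvStepB dpB i (some q) (pvVal b) = some (p.1 + 1, pvVal b) := by
                simp [pvStepB, hvi, hgB, hlt]
              rw [hA', hstepB]
              exact pvRelMid_update N dpB i (some q) dpA folA (hbst ▸ hrel) (by omega) hiN
                (p.1 + 1) (pvVal b)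
            · have hnoopA : pvStepA i (dpA, folA) b = (dpA, folA) := by
                simp only [pvStepA]
                rw [if_pos ⟨hvi, hs0⟩]
                simp [hgA, hcur, pvLtInf, hlt]
              have hstepB : pvStepB dpB i (some q) (pvVal b) = some q := by
                simp [pvStepB, hvi, hgB, hlt]
              rw [hnoopA, hstepB]
              exact hbst ▸ hrel
      · have hnoopA : pvStepA i (dpA, folA) b = (dpA, folA) := by
          simp only [pvStepA]
          rw [if_neg (by tauto)]
        have hnoopB : pvStepB dpB i best (pvVal b) = best := by
          simp [pvStepB, hvi]
        rw [hnoopA, hnoopB]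
        exact hrel
    · have hveq : pvVal b = 0 := by omega
      rw [if_neg (by omega)]
      have hii := hread i (by omega) hiN
      rw [if_pos rfl] at hii
      have hnoopA : pvStepA i (dpA, folA) b = (dpA, folA) := by
        simp only [pvStepA, hveq]
        rw [if_pos ⟨by omega, hs0⟩]
        simp only [sub_zero]
        cases hbst : best with
        | none =>
          have hcur : PySem.List.pyGetD dpA i none = none := by rw [hii.1, hbst]; rfl
          simp [hcur]
        | some q =>
          have hcur : PySem.List.pyGetD dpA i none = some q.1 := by rw [hii.1, hbst]; rfl
          simp [hcur, pvLtInf, show ¬ (q.1 + 1 < q.1) by omega]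
      rw [hnoopA]
      exact hrel

lemma pvInner (N : Nat) (dpB : List (Option (Int × Int))) (i : Int)
    (hi1 : 1 ≤ i) (hiN : i < (N : Int)) (hlen : (dpB.length : Int) = i) :
    ∀ (l : List (List (String × Int))) (vs : List Int) (best : Option (Int × Int))
      (dpA : List (Option Int)) (folA : List Int),
      (∀ b ∈ l, pvVal b < 0 → pvStoc b ≤ 0) →
      pvRelMid dpA folA dpB i best N →
      pvSat dpB i vs best →
      pvRelMid (l.foldl (pvStepA i) (dpA, folA)).1 (l.foldl (pvStepA i) (dpA, folA)).2 dpB i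
        ((pvNewVals l vs).foldl (pvStepB dpB i) best) N := by
  intro l
  induction l with
  | nil =>
    intro vs best dpA folA _ hrel _
    simpa [pvNewVals] using hrel
  | cons b l ih =>
    intro vs best dpA folA hb hrel hsat
    have hbmem : pvVal b < 0 → pvStoc b ≤ 0 := hb b (by simp)
    have hbl : ∀ x ∈ l, pvVal x < 0 → pvStoc x ≤ 0 := fun x hx => hb x (by simp [hx])
    have hstep := pvStepA_rel N dpB i best dpA folA b hi1 hiN hlen hbmem hrel
    simp only [List.foldl_cons]
    by_cases hc : 1 ≤ pvVal b ∧ 0 < pvStoc b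
    · rw [if_pos hc] at hstep
      by_cases hmem : pvVal b ∈ vs
      · rw [show pvNewVals (b :: l) vs = pvNewVals l vs from by
          simp only [pvNewVals]; rw [if_neg (by tauto)]]
        have hnoop : pvStepB dpB i best (pvVal b) = best := hsat _ hmem
        rw [hnoop] at hstep
        have := ih vs best (pvStepA i (dpA, folA) b).1 (pvStepA i (dpA, folA) b).2
          hbl hstep hsat
        simpa using this
      · rw [show pvNewVals (b :: l) vs = pvVal b :: pvNewVals l (vs ++ [pvVal b]) from by
          simp only [pvNewVals]; rw [if_pos ⟨hc.1, hc.2, hmem⟩]]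
        rw [List.foldl_cons]
        have hsat' : pvSat dpB i (vs ++ [pvVal b]) (pvStepB dpB i best (pvVal b)) := by
          intro u hu
          rcases List.mem_append.mp hu with h1 | h2
          · exact pvStepB_noop_mono dpB i best _ u (hsat u h1) (pvBelow_step dpB i best _)
          · rw [List.mem_singleton] at h2
            subst h2
            exact pvStepB_idem dpB i best (pvVal b)
        have := ih (vs ++ [pvVal b]) (pvStepB dpB i best (pvVal b))
          (pvStepA i (dpA, folA) b).1 (pvStepA i (dpA, folA) b).2 hbl hstep hsat'
        simpa using this
    · rw [if_neg hc] at hstep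
      rw [show pvNewVals (b :: l) vs = pvNewVals l vs from by
        simp only [pvNewVals]; rw [if_neg (by tauto)]]
      have := ih vs best (pvStepA i (dpA, folA) b).1 (pvStepA i (dpA, folA) b).2
        hbl hstep hsat
      simpa using this

lemma pvValsFold (l : List (List (String × Int))) (vs : List Int) :
    l.foldl (fun vs b =>
      if 1 ≤ pvVal b ∧ 0 < pvStoc b ∧ pvVal b ∉ vs then vs ++ [pvVal b] else vs) vs =
    vs ++ pvNewVals l vs := by
  induction l generalizing vs with
  | nil => simp [pvNewVals]
  | cons b l ih =>
    simp only [List.foldl_cons, pvNewVals]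
    by_cases h : 1 ≤ pvVal b ∧ 0 < pvStoc b ∧ pvVal b ∉ vs
    · rw [if_pos h, if_pos h, ih]; simp
    · rw [if_neg h, if_neg h, ih]

lemma pvFoldB_length (l : List Int) (vals : List Int) (init : List (Option (Int × Int))) :
    (l.foldl (fun dp i => dp ++ [pvBest dp i vals]) init).length = init.length + l.length := by
  induction l generalizing init with
  | nil => simp
  | cons x l ih => simp [ih]; omega

lemma pvGetD_append_one {α : Type} (xs : List α) (x : α) (j : Int) (d : α) (hj : 0 ≤ j) :
    PySem.List.pyGetD (xs ++ [x]) j d =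
      if j = (xs.length : Int) then x else PySem.List.pyGetD xs j d := by
  have key : ∀ n : Nat, (xs ++ [x])[n]?.getD d =
      if ((n : Nat) : Int) = (xs.length : Int) then x else xs[n]?.getD d := by
    intro n
    by_cases h : n = xs.length
    · subst h
      simp
    · rw [if_neg (by exact_mod_cast h)]
      rcases Nat.lt_or_ge n xs.length with h1 | h1
      · rw [List.getElem?_append_left h1]
      · rw [List.getElem?_eq_none (by simp; omega), List.getElem?_eq_none (by omega)]
  have hj' : j = ((j.toNat : Nat) : Int) := by omega
  rw [hj']
  simp only [PySem.List.pyGetD, PySem.List.pyGet?_natCast]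
  exact key j.toNat

lemma pvOuter (rest : Int) (bancnote : List (List (String × Int)))
    (hPre : Pre_calculeaza_rest_optim rest bancnote) :
    ∀ n : Nat, n ≤ rest.toNat →
      pvRel
        (((PySem.List.pyRange 1 ((n : Int) + 1) 1).foldl
          (fun st i => (PySem.List.sorted bancnote (fun x => pvVal x) true).foldl (pvStepA i) st)
          (PySem.List.pySetD (List.replicate (rest + 1).toNat (none : Option Int)) 0 (some 0),
           List.replicate (rest + 1).toNat 0)).1)
        (((PySem.List.pyRange 1 ((n : Int) + 1) 1).foldl
          (fun st i => (PySem.List.sorted bancnote (fun x => pvVal x) true).foldl (pvStepA i) st)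
          (PySem.List.pySetD (List.replicate (rest + 1).toNat (none : Option Int)) 0 (some 0),
           List.replicate (rest + 1).toNat 0)).2)
        ((PySem.List.pyRange 1 ((n : Int) + 1) 1).foldl
          (fun dp i => dp ++ [pvBest dp i (pvValsB bancnote)]) [some ((0 : Int), (0 : Int))])
        (rest + 1).toNat := by
  obtain ⟨hrest, hbanc⟩ := hPre
  intro n
  induction n with
  | zero =>
    intro _
    rw [show ((0 : Nat) : Int) + 1 = 1 by norm_num]
    rw [PySem.List.pyRange_one_eq_nil (le_refl 1)]
    simp only [List.foldl_nil]
    refine ⟨by simp [PySem.List.length_pySetD], by simp, ?_⟩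
    intro j hj0 hjN
    have hdpA : PySem.List.pyGetD (PySem.List.pySetD
        (List.replicate (rest + 1).toNat (none : Option Int)) 0 (some 0)) j none =
        if j = 0 then some 0 else none := by
      rw [PySem.List.pySetD_of_nonneg _ (some 0) (le_refl 0)]
      rw [PySem.List.pyGetD_eq_getElem _ none hj0 (by simp; omega)]
      rw [List.getElem_set]
      by_cases hj : j = 0
      · rw [if_pos (by omega), if_pos hj]
      · rw [if_neg (by omega), if_neg hj]
        exact List.getElem_replicate _
    have hfol : PySem.List.pyGetD (List.replicate (rest + 1).toNat (0 : Int)) j 0 = 0 := by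
      rw [PySem.List.pyGetD_eq_getElem _ 0 hj0 (by simp; omega)]
      exact List.getElem_replicate _
    by_cases hj : j = 0
    · subst hj
      rw [hdpA, if_pos rfl, hfol]
      rw [show PySem.List.pyGetD [some ((0 : Int), (0 : Int))] 0 none = some (0, 0) from
        PySem.List.pyGetD_zero_cons _ _ _]
      exact ⟨rfl, rfl⟩
    · have hout : PySem.List.pyGet? [some ((0 : Int), (0 : Int))] j = none := by
        rw [PySem.List.pyGet?_eq_none_iff, PySem.Raise.InRange]
        simp only [List.length_cons, List.length_nil]
        omega
      rw [hdpA, if_neg hj, hfol, PySem.List.pyGetD_of_none _ _ _ hout]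
      exact ⟨rfl, rfl⟩
  | succ n ihn =>
    intro hn1
    have ih := ihn (by omega)
    have hi1 : (1 : Int) ≤ (n : Int) + 1 := by omega
    rw [show (((n + 1 : Nat)) : Int) + 1 = ((n : Int) + 1) + 1 by omega]
    rw [PySem.List.pyRange_one_succ_right hi1]
    simp only [List.foldl_append, List.foldl_cons, List.foldl_nil]
    have hlen0 : (PySem.List.pyRange 1 ((n : Int) + 1) 1).length = n := by
      rw [PySem.List.length_pyRange_one]; omega
    have hlenB : (((PySem.List.pyRange 1 ((n : Int) + 1) 1).foldl
        (fun dp i => dp ++ [pvBest dp i (pvValsB bancnote)])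
        [some ((0 : Int), (0 : Int))]).length : Int) = (n : Int) + 1 := by
      rw [pvFoldB_length, hlen0]; simp; omega
    have hiN : (n : Int) + 1 < (((rest + 1).toNat : Nat) : Int) := by omega
    obtain ⟨hA, hF, hread⟩ := ih
    have hmid : pvRelMid
        (((PySem.List.pyRange 1 ((n : Int) + 1) 1).foldl
          (fun st i => (PySem.List.sorted bancnote (fun x => pvVal x) true).foldl (pvStepA i) st)
          (PySem.List.pySetD (List.replicate (rest + 1).toNat (none : Option Int)) 0 (some 0),
           List.replicate (rest + 1).toNat 0)).1)
        (((PySem.List.pyRange 1 ((n : Int) + 1) 1).foldl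
          (fun st i => (PySem.List.sorted bancnote (fun x => pvVal x) true).foldl (pvStepA i) st)
          (PySem.List.pySetD (List.replicate (rest + 1).toNat (none : Option Int)) 0 (some 0),
           List.replicate (rest + 1).toNat 0)).2)
        ((PySem.List.pyRange 1 ((n : Int) + 1) 1).foldl
          (fun dp i => dp ++ [pvBest dp i (pvValsB bancnote)]) [some ((0 : Int), (0 : Int))])
        ((n : Int) + 1) none (rest + 1).toNat := by
      refine ⟨hA, hF, ?_⟩
      intro j hj0 hjN
      by_cases hji : j = (n : Int) + 1
      · subst hji
        have hout : PySem.List.pyGet?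
            ((PySem.List.pyRange 1 ((n : Int) + 1) 1).foldl
              (fun dp i => dp ++ [pvBest dp i (pvValsB bancnote)])
              [some ((0 : Int), (0 : Int))]) ((n : Int) + 1) = none := by
          rw [PySem.List.pyGet?_eq_none_iff, PySem.Raise.InRange]
          omega
        have h1 := hread ((n : Int) + 1) hj0 hjN
        rw [PySem.List.pyGetD_of_none _ _ _ hout] at h1
        rw [if_pos rfl, if_pos rfl]
        exact h1
      · rw [if_neg hji, if_neg hji]
        exact hread j hj0 hjN
    have hbmem : ∀ b ∈ PySem.List.sorted bancnote (fun x => pvVal x) true,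
        pvVal b < 0 → pvStoc b ≤ 0 := by
      intro b hb' hneg
      have hmem := (PySem.List.mem_sorted bancnote _ true b).mp hb'
      have h2 := (hbanc b hmem).2.2.2 (by omega : 1 ≤ rest)
      omega
    have hin := pvInner (rest + 1).toNat _ ((n : Int) + 1) hi1 hiN hlenB
      (PySem.List.sorted bancnote (fun x => pvVal x) true) [] none _ _ hbmem hmid
      (by intro u hu; simp at hu)
    have hvals : pvValsB bancnote =
        pvNewVals (PySem.List.sorted bancnote (fun x => pvVal x) true) [] := by
      rw [pvValsB, pvValsFold]; simp
    have hbest : (pvNewVals (PySem.List.sorted bancnote (fun x => pvVal x) true) []).foldl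
        (pvStepB ((PySem.List.pyRange 1 ((n : Int) + 1) 1).foldl
          (fun dp i => dp ++ [pvBest dp i (pvValsB bancnote)]) [some ((0 : Int), (0 : Int))])
          ((n : Int) + 1)) none =
        pvBest ((PySem.List.pyRange 1 ((n : Int) + 1) 1).foldl
          (fun dp i => dp ++ [pvBest dp i (pvValsB bancnote)]) [some ((0 : Int), (0 : Int))])
          ((n : Int) + 1) (pvValsB bancnote) := by
      rw [pvBest, hvals]
    rw [hbest] at hin
    obtain ⟨hA', hF', hread'⟩ := hin
    refine ⟨hA', hF', ?_⟩
    intro j hj0 hjN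
    constructor
    · rw [pvGetD_append_one _ _ j none hj0]
      by_cases hji : j = (n : Int) + 1
      · rw [if_pos (by omega), (hread' j hj0 hjN).1, if_pos hji]
      · rw [if_neg (by omega), (hread' j hj0 hjN).1, if_neg hji]
    · rw [pvGetD_append_one _ _ j none hj0]
      by_cases hji : j = (n : Int) + 1
      · rw [if_pos (by omega), (hread' j hj0 hjN).2, if_pos hji]
      · rw [if_neg (by omega), (hread' j hj0 hjN).2, if_neg hji]

lemma pvCheckA_eq_all (items : List (Int × Int)) (bancnote : List (List (String × Int))) :
    pvCheckA items bancnote = items.all (fun p =>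
      match bancnote.find? (fun x => pvVal x == p.1) with
      | some b => !(pvStoc b < p.2)
      | none => false) := by
  induction items with
  | nil => rfl
  | cons p items ih =>
    obtain ⟨v, c⟩ := p
    simp only [pvCheckA, List.all_cons]
    cases h : bancnote.find? (fun x => pvVal x == v) with
    | none => simp
    | some b =>
      by_cases hs : pvStoc b < c
      · simp [hs]
      · simp [hs, ih]

lemma pvCounts_eq (solutie : List Int) :
    solutie.foldl (fun d v =>
      let d' := if d.contains v then d else d.insert v 0
      d'.insert v (d'.getD v 0 + 1)) (PySem.Dict.empty : PySem.Dict Int Int) =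
    PySem.Dict.counter solutie := by
  have hstep : (fun (d : PySem.Dict Int Int) (v : Int) =>
      let d' := if d.contains v then d else d.insert v 0
      d'.insert v (d'.getD v 0 + 1)) = fun d v => d.insert v (d.getD v 0 + 1) := by
    funext d v
    by_cases h : d.contains v
    · simp [h]
    · simp only [h, Bool.false_eq_true, ite_false]
      rw [PySem.Dict.getD_insert_self, PySem.Dict.insert_insert_self,
        PySem.Dict.getD_of_not_contains d 0 (by simpa using h)]
  rw [hstep, PySem.Dict.foldl_insert_getD_add_one_eq_counter]

-- ============ the pure dp function pvD and its recurrence ============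

def pvDPn (vals : List Int) (n : Nat) : List (Option (Int × Int)) :=
  (PySem.List.pyRange 1 ((n : Int) + 1) 1).foldl
    (fun dp i => dp ++ [pvBest dp i vals]) [some ((0 : Int), (0 : Int))]

def pvD (vals : List Int) (i : Int) : Option (Int × Int) :=
  PySem.List.pyGetD (pvDPn vals i.toNat) i none

lemma pvDPn_length (vals : List Int) (n : Nat) : (pvDPn vals n).length = n + 1 := by
  rw [pvDPn, pvFoldB_length, PySem.List.length_pyRange_one]
  simp
  omega

lemma pvDPn_succ (vals : List Int) (n : Nat) :
    pvDPn vals (n + 1) = pvDPn vals n ++ [pvBest (pvDPn vals n) ((n : Int) + 1) vals] := by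
  rw [pvDPn, pvDPn, show (((n + 1 : Nat)) : Int) + 1 = ((n : Int) + 1) + 1 by omega,
    PySem.List.pyRange_one_succ_right (by omega : (1 : Int) ≤ (n : Int) + 1)]
  rw [List.foldl_append]
  rfl

lemma pvDPn_getD_mono (vals : List Int) (n m : Nat) (hnm : n ≤ m) (j : Int)
    (hj0 : 0 ≤ j) (hjn : j ≤ (n : Int)) :
    PySem.List.pyGetD (pvDPn vals m) j none = PySem.List.pyGetD (pvDPn vals n) j none := by
  induction m with
  | zero => rw [Nat.le_zero.mp hnm]
  | succ k ih =>
    rcases Nat.lt_or_ge n (k + 1) with h | h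
    · have hnk : n ≤ k := by omega
      rw [pvDPn_succ, pvGetD_append_one _ _ j none hj0, pvDPn_length,
        if_neg (by push_cast; omega), ih hnk]
    · rw [Nat.le_antisymm hnm h]

lemma pvD_eq_getD (vals : List Int) (n : Nat) (j : Int) (hj0 : 0 ≤ j) (hjn : j ≤ (n : Int)) :
    PySem.List.pyGetD (pvDPn vals n) j none = pvD vals j := by
  rw [pvD, pvDPn_getD_mono vals j.toNat n (by omega) j hj0 (by omega)]

lemma pvD_zero (vals : List Int) : pvD vals 0 = some (0, 0) := by
  rw [pvD]
  have h0 : pvDPn vals (0 : Int).toNat = [some ((0 : Int), (0 : Int))] := by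
    rw [pvDPn]
    norm_num [PySem.List.pyRange_one_eq_nil (le_refl (1 : Int))]
  rw [h0, PySem.List.pyGetD_zero_cons]

-- the same step reading pvD instead of a dp list
def pvStepD (vals : List Int) (i : Int) (best : Option (Int × Int)) (v : Int) :
    Option (Int × Int) :=
  if v ≤ i then
    match pvD vals (i - v) with
    | some p =>
      match best with
      | none => some (p.1 + 1, v)
      | some q => if p.1 + 1 < q.1 then some (p.1 + 1, v) else best
    | none => best
  else best

lemma pvD_rec (vals : List Int) (hv1 : ∀ v ∈ vals, 1 ≤ v) (i : Int) (hi : 1 ≤ i) :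
    pvD vals i = vals.foldl (pvStepD vals i) none := by
  obtain ⟨k, hk⟩ : ∃ k : Nat, i = (k : Int) + 1 := ⟨(i - 1).toNat, by omega⟩
  subst hk
  rw [pvD, show ((k : Int) + 1).toNat = k + 1 by omega, pvDPn_succ,
    pvGetD_append_one _ _ _ none (by omega), pvDPn_length,
    if_pos (by push_cast; omega)]
  rw [pvBest]
  apply PySem.List.foldl_congr_mem
  intro acc v hv
  have hv1' := hv1 v hv
  simp only [pvStepB, pvStepD]
  by_cases hvi : v ≤ (k : Int) + 1
  · rw [if_pos hvi, if_pos hvi,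
      pvD_eq_getD vals k ((k : Int) + 1 - v) (by omega) (by omega)]
  · rw [if_neg hvi, if_neg hvi]

-- ============ characterisation of the strict-improvement fold ============

lemma pvFoldD_isSome (vals : List Int) (i : Int) (l : List Int) (q : Int × Int) :
    (l.foldl (pvStepD vals i) (some q)).isSome = true := by
  induction l generalizing q with
  | nil => rfl
  | cons v t ih =>
    simp only [List.foldl_cons]
    have hstep : ∃ q2, pvStepD vals i (some q) v = some q2 := by
      simp only [pvStepD]
      by_cases hvi : v ≤ i
      · rw [if_pos hvi]
        cases h : pvD vals (i - v) with
        | none => exact ⟨q, rfl⟩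
        | some p =>
          by_cases hlt : p.1 + 1 < q.1
          · exact ⟨(p.1 + 1, v), by simp [hlt]⟩
          · exact ⟨q, by simp [hlt]⟩
      · rw [if_neg hvi]; exact ⟨q, rfl⟩
    obtain ⟨q2, hq2⟩ := hstep
    rw [hq2]
    exact ih q2

lemma pvFoldD_nocand (vals : List Int) (i : Int) (l : List Int)
    (h : l.foldl (pvStepD vals i) none = none) :
    ∀ v ∈ l, v ≤ i → pvD vals (i - v) = none := by
  induction l with
  | nil => intro v hv; simp at hv
  | cons v t ih =>
    intro u hu hui
    rw [List.foldl_cons] at h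
    have hnone : pvStepD vals i none v = none := by
      cases hs : pvStepD vals i none v with
      | none => rfl
      | some q =>
        rw [hs] at h
        have hsm := pvFoldD_isSome vals i t q
        rw [h] at hsm
        simp at hsm
    rw [hnone] at h
    rcases List.mem_cons.mp hu with h1 | h2
    · subst h1
      simp only [pvStepD, if_pos hui] at hnone
      cases hp : pvD vals (i - u) with
      | none => rfl
      | some p => rw [hp] at hnone; simp at hnone
    · exact ih h u h2 hui

lemma pvFoldD_mem (vals : List Int) (i : Int) (l : List Int) (b : Option (Int × Int))
    (y : Int × Int) (h : l.foldl (pvStepD vals i) b = some y) :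
    b = some y ∨ (y.2 ∈ l ∧ y.2 ≤ i ∧ ∃ w, pvD vals (i - y.2) = some (y.1 - 1, w)) := by
  induction l generalizing b with
  | nil => exact Or.inl h
  | cons v t ih =>
    rw [List.foldl_cons] at h
    rcases ih (pvStepD vals i b v) h with h1 | h2
    · by_cases hvi : v ≤ i
      · cases hp : pvD vals (i - v) with
        | none =>
          left
          rw [← h1]
          simp only [pvStepD, if_pos hvi, hp]
        | some p =>
          cases b with
          | none =>
            simp only [pvStepD, if_pos hvi, hp] at h1
            have hy : y = (p.1 + 1, v) := by injection h1 with h1x; exact h1x.symm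
            subst hy
            right
            exact ⟨List.mem_cons_self, hvi, p.2, by rw [show p.1 + 1 - 1 = p.1 by omega, hp]⟩
          | some qq =>
            by_cases hlt : p.1 + 1 < qq.1
            · simp only [pvStepD, if_pos hvi, hp, hlt, if_true] at h1
              have hy : y = (p.1 + 1, v) := by injection h1 with h1x; exact h1x.symm
              subst hy
              right
              exact ⟨List.mem_cons_self, hvi, p.2, by rw [show p.1 + 1 - 1 = p.1 by omega, hp]⟩
            · left
              rw [← h1]
              simp only [pvStepD, if_pos hvi, hp, hlt, if_false]
      · left
        rw [← h1]
        simp only [pvStepD, if_neg hvi]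
    · right
      exact ⟨List.mem_cons_of_mem v h2.1, h2.2⟩

lemma pvBelowD_step (vals : List Int) (i : Int) (b : Option (Int × Int)) (v : Int) :
    pvBelow (pvStepD vals i b v) b := by
  intro y hy
  subst hy
  simp only [pvStepD]
  split
  · cases h : pvD vals (i - v) with
    | none => exact ⟨y, rfl, le_refl _⟩
    | some p =>
      by_cases hlt : p.1 + 1 < y.1
      · exact ⟨(p.1 + 1, v), by simp [hlt], le_of_lt hlt⟩
      · exact ⟨y, by simp [hlt], le_refl _⟩
  · exact ⟨y, rfl, le_refl _⟩

lemma pvBelowD_fold (vals : List Int) (i : Int) (l : List Int) (b : Option (Int × Int)) :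
    pvBelow (l.foldl (pvStepD vals i) b) b := by
  induction l generalizing b with
  | nil => exact fun y hy => ⟨y, hy, le_refl _⟩
  | cons v t ih =>
    rw [List.foldl_cons]
    intro y hy
    obtain ⟨y₂, hy₂, hle₂⟩ := pvBelowD_step vals i b v y hy
    obtain ⟨y₃, hy₃, hle₃⟩ := ih (pvStepD vals i b v) y₂ hy₂
    exact ⟨y₃, hy₃, le_trans hle₃ hle₂⟩

lemma pvFoldD_min (vals : List Int) (i : Int) (l : List Int) (b : Option (Int × Int))
    (y : Int × Int) (h : l.foldl (pvStepD vals i) b = some y) :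
    ∀ v ∈ l, v ≤ i → ∀ p, pvD vals (i - v) = some p → y.1 ≤ p.1 + 1 := by
  induction l generalizing b with
  | nil => intro u hu; simp at hu
  | cons v t ih =>
    rw [List.foldl_cons] at h
    intro u hu hui p hp
    rcases List.mem_cons.mp hu with h1 | h2
    · subst h1
      have hb2 : ∃ q2, pvStepD vals i b u = some q2 ∧ q2.1 ≤ p.1 + 1 := by
        simp only [pvStepD, if_pos hui, hp]
        cases b with
        | none => exact ⟨(p.1 + 1, u), rfl, le_refl _⟩
        | some q =>
          by_cases hlt : p.1 + 1 < q.1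
          · exact ⟨(p.1 + 1, u), by simp [hlt], le_refl _⟩
          · exact ⟨q, by simp [hlt], by omega⟩
      obtain ⟨q2, hq2, hle⟩ := hb2
      obtain ⟨y₂, hy₂, hle₂⟩ := pvBelowD_fold vals i t (pvStepD vals i b u) q2 hq2
      rw [h] at hy₂
      have hyy : y₂ = y := by injection hy₂ with hx; exact hx.symm
      subst hyy
      omega
    · exact ih (pvStepD vals i b v) h u h2 hui p hp

lemma pvFoldD_keep (vals : List Int) (i : Int) (l : List Int) (q y : Int × Int)
    (h : l.foldl (pvStepD vals i) (some q) = some y) : y.1 < q.1 ∨ y = q := by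
  induction l generalizing q with
  | nil =>
    right
    injection h with h1
    exact h1.symm
  | cons v t ih =>
    rw [List.foldl_cons] at h
    by_cases hvi : v ≤ i
    · cases hp : pvD vals (i - v) with
      | none =>
        rw [show pvStepD vals i (some q) v = some q by
          simp only [pvStepD, if_pos hvi, hp]] at h
        exact ih q h
      | some p =>
        by_cases hlt : p.1 + 1 < q.1
        · rw [show pvStepD vals i (some q) v = some (p.1 + 1, v) by
            simp only [pvStepD, if_pos hvi, hp]; simp [hlt]] at h
          obtain ⟨y₂, hy₂, hle₂⟩ :=
            pvBelowD_fold vals i t (some (p.1 + 1, v)) (p.1 + 1, v) rfl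
          rw [h] at hy₂
          have hyy : y₂ = y := by injection hy₂ with hx; exact hx.symm
          subst hyy
          left
          simp at hle₂
          omega
        · rw [show pvStepD vals i (some q) v = some q by
            simp only [pvStepD, if_pos hvi, hp]; simp [hlt]] at h
          exact ih q h
    · rw [show pvStepD vals i (some q) v = some q by
        simp only [pvStepD, if_neg hvi]] at h
      exact ih q h

def pvPredC (vals : List Int) (i c : Int) (v : Int) : Bool :=
  decide (v ≤ i) && (match pvD vals (i - v) with
    | some p => decide (p.1 + 1 = c)
    | none => false)

lemma pvFoldD_first_aux (vals : List Int) (i : Int) (l : List Int) (q y : Int × Int)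
    (h : l.foldl (pvStepD vals i) (some q) = some y) (hlt : y.1 < q.1) :
    l.find? (pvPredC vals i y.1) = some y.2 := by
  induction l generalizing q with
  | nil =>
    injection h with h1
    subst h1
    omega
  | cons v t ih =>
    rw [List.foldl_cons] at h
    by_cases hvi : v ≤ i
    · cases hp : pvD vals (i - v) with
      | none =>
        rw [List.find?_cons, show pvPredC vals i y.1 v = false by
          simp [pvPredC, hp]]
        rw [show pvStepD vals i (some q) v = some q by
          simp only [pvStepD, if_pos hvi, hp]] at h
        exact ih q h hlt
      | some p =>
        by_cases hup : p.1 + 1 < q.1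
        · rw [show pvStepD vals i (some q) v = some (p.1 + 1, v) by
            simp only [pvStepD, if_pos hvi, hp]; simp [hup]] at h
          rcases pvFoldD_keep vals i t (p.1 + 1, v) y h with h1 | h2
          · simp only at h1
            rw [List.find?_cons, show pvPredC vals i y.1 v = false by
              simp only [pvPredC, hp]
              simp
              intro
              omega]
            exact ih (p.1 + 1, v) h (by simpa using h1)
          · subst h2
            rw [List.find?_cons, show pvPredC vals i (p.1 + 1, v).1 v = true by
              simp [pvPredC, hp, hvi]]
        · rw [show pvStepD vals i (some q) v = some q by
            simp only [pvStepD, if_pos hvi, hp]; simp [hup]] at h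
          have hne : y.1 < p.1 + 1 := by omega
          rw [List.find?_cons, show pvPredC vals i y.1 v = false by
            simp only [pvPredC, hp]
            simp
            intro
            omega]
          exact ih q h hlt
    · rw [List.find?_cons, show pvPredC vals i y.1 v = false by
        simp [pvPredC, hvi]]
      rw [show pvStepD vals i (some q) v = some q by
        simp only [pvStepD, if_neg hvi]] at h
      exact ih q h hlt

lemma pvFoldD_first (vals : List Int) (i : Int) (l : List Int) (y : Int × Int)
    (h : l.foldl (pvStepD vals i) none = some y) :
    l.find? (pvPredC vals i y.1) = some y.2 := by
  induction l with
  | nil => simp at h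
  | cons v t ih =>
    rw [List.foldl_cons] at h
    by_cases hvi : v ≤ i
    · cases hp : pvD vals (i - v) with
      | none =>
        rw [List.find?_cons, show pvPredC vals i y.1 v = false by
          simp [pvPredC, hp]]
        rw [show pvStepD vals i none v = none by
          simp only [pvStepD, if_pos hvi, hp]] at h
        exact ih h
      | some p =>
        rw [show pvStepD vals i none v = some (p.1 + 1, v) by
          simp only [pvStepD, if_pos hvi, hp]] at h
        rcases pvFoldD_keep vals i t (p.1 + 1, v) y h with h1 | h2
        · simp only at h1
          rw [List.find?_cons, show pvPredC vals i y.1 v = false by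
            simp only [pvPredC, hp]
            simp
            intro
            omega]
          exact pvFoldD_first_aux vals i t (p.1 + 1, v) y h (by simpa using h1)
        · subst h2
          rw [List.find?_cons, show pvPredC vals i (p.1 + 1, v).1 v = true by
            simp [pvPredC, hp, hvi]]
    · rw [List.find?_cons, show pvPredC vals i y.1 v = false by
        simp [pvPredC, hvi]]
      rw [show pvStepD vals i none v = none by
        simp only [pvStepD, if_neg hvi]] at h
      exact ih h

-- ============ facts about pvD ============

lemma pvD_find (vals : List Int) (hv1 : ∀ v ∈ vals, 1 ≤ v) (i : Int) (hi : 1 ≤ i)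
    (y : Int × Int) (h : pvD vals i = some y) :
    vals.find? (pvPredC vals i y.1) = some y.2 := by
  rw [pvD_rec vals hv1 i hi] at h
  exact pvFoldD_first vals i vals y h

lemma pvD_reach (vals : List Int) (hv1 : ∀ v ∈ vals, 1 ≤ v) (i : Int) (hi : 1 ≤ i)
    (v : Int) (hv : v ∈ vals) (hvi : v ≤ i) (m w : Int)
    (h : pvD vals (i - v) = some (m, w)) :
    ∃ y, pvD vals i = some y ∧ y.1 ≤ m + 1 := by
  rw [pvD_rec vals hv1 i hi]
  cases hr : vals.foldl (pvStepD vals i) none with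
  | none =>
    have := pvFoldD_nocand vals i vals hr v hv hvi
    rw [h] at this
    simp at this
  | some y =>
    refine ⟨y, rfl, ?_⟩
    exact pvFoldD_min vals i vals none y hr v hv hvi (m, w) h

lemma pvD_bounds (vals : List Int) (hv1 : ∀ v ∈ vals, 1 ≤ v) :
    ∀ n : Nat, ∀ y, pvD vals (n : Int) = some y →
      (0 ≤ y.1 ∧ y.1 ≤ (n : Int)) ∧
      (1 ≤ n → 1 ≤ y.1 ∧ y.2 ∈ vals ∧ 1 ≤ y.2 ∧ y.2 ≤ (n : Int)) := by
  intro n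
  induction n using Nat.strong_induction_on with
  | _ n ih =>
    intro y h
    match n with
    | 0 =>
      simp only [Nat.cast_zero] at h ⊢
      rw [pvD_zero] at h
      have hy : y = (0, 0) := by injection h with hx; exact hx.symm
      subst hy
      exact ⟨⟨le_refl _, by norm_num⟩, by omega⟩
    | Nat.succ k =>
      have hi1 : (1 : Int) ≤ ((k + 1 : Nat) : Int) := by push_cast; omega
      rw [pvD_rec vals hv1 _ hi1] at h
      rcases pvFoldD_mem vals _ vals none y h with h1 | ⟨hmem, hle, w, hsub⟩
      · simp at h1
      · have hv2 : 1 ≤ y.2 := hv1 y.2 hmem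
        have hjn : ((k + 1 : Nat) : Int) - y.2 = (((((k + 1 : Nat) : Int) - y.2).toNat : Nat) : Int) := by
          omega
        rw [hjn] at hsub
        have hlt : (((k + 1 : Nat) : Int) - y.2).toNat < k + 1 := by omega
        have hb := (ih _ hlt _ hsub).1
        simp only at hb
        refine ⟨⟨by omega, by omega⟩, fun _ => ⟨by omega, hmem, hv2, by push_cast at hle ⊢; omega⟩⟩

lemma pvD_descend (vals : List Int) (hv1 : ∀ v ∈ vals, 1 ≤ v) :
    ∀ n : Nat, ∀ y, pvD vals (n : Int) = some y → ∀ c, 0 ≤ c → c ≤ y.1 →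
      ∃ m : Nat, (m : Int) ≤ (n : Int) ∧ ∃ w, pvD vals (m : Int) = some (c, w) := by
  intro n
  induction n using Nat.strong_induction_on with
  | _ n ih =>
    intro y h c hc0 hcy
    by_cases hcy' : c = y.1
    · exact ⟨n, le_refl _, y.2, by rw [h, hcy']⟩
    · have hclt : c < y.1 := by omega
      match n with
      | 0 =>
        simp only [Nat.cast_zero] at h ⊢
        rw [pvD_zero] at h
        have hy : y = (0, 0) := by injection h with hx; exact hx.symm
        subst hy
        simp at hclt
        omega
      | Nat.succ k =>
        have hi1 : (1 : Int) ≤ ((k + 1 : Nat) : Int) := by push_cast; omega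
        have h' := h
        rw [pvD_rec vals hv1 _ hi1] at h'
        rcases pvFoldD_mem vals _ vals none y h' with h1 | ⟨hmem, hle, w, hsub⟩
        · simp at h1
        · have hv2 : 1 ≤ y.2 := hv1 y.2 hmem
          have hjn : ((k + 1 : Nat) : Int) - y.2 =
              (((((k + 1 : Nat) : Int) - y.2).toNat : Nat) : Int) := by omega
          rw [hjn] at hsub
          have hlt : (((k + 1 : Nat) : Int) - y.2).toNat < k + 1 := by omega
          obtain ⟨m, hm, w2, hw2⟩ := ih _ hlt _ hsub c hc0 (by simp only; omega)
          exact ⟨m, by omega, w2, hw2⟩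

-- ============ BFS invariants ============

def pvInbB (rest i : Int) : Bool := decide (0 ≤ i) && decide (i ≤ rest)

def pvLowB (vals : List Int) (m i : Int) : Bool :=
  match pvD vals i with
  | some y => decide (y.1 ≤ m)
  | none => false

def pvAtB (vals : List Int) (m i : Int) : Bool :=
  match pvD vals i with
  | some y => decide (y.1 = m)
  | none => false

def pvClaimedByB (vals : List Int) (m : Int) (p : List Int) (i : Int) : Bool :=
  match vals.find? (pvPredC vals i (m + 1)) with
  | some v => decide (v ∈ p)
  | none => false

def pvDiscB (rest : Int) (vals : List Int) (m : Int) (p : List Int) (i : Int) : Bool :=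
  pvInbB rest i && (pvLowB vals m i || (pvAtB vals (m + 1) i && pvClaimedByB vals m p i))

def pvNewB (rest : Int) (vals : List Int) (m : Int) (p : List Int) (i : Int) : Bool :=
  pvInbB rest i && pvAtB vals (m + 1) i && pvClaimedByB vals m p i

def pvClaimQB (rest : Int) (vals : List Int) (m v : Int) (q : List Int) (i : Int) : Bool :=
  pvInbB rest i && pvAtB vals (m + 1) i &&
    decide (vals.find? (pvPredC vals i (m + 1)) = some v) && decide (i - v ∈ q)

def pvCSpec (rest : Int) (vals : List Int) (m : Int) (d : PySem.Dict Int Int) : Prop :=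
  ∀ i : Int, d.get? i =
    if pvInbB rest i && pvLowB vals m i then some (pvChoice (pvD vals i)) else none

def pvFSpec (rest : Int) (vals : List Int) (m : Int) (fr : List Int) : Prop :=
  fr.Nodup ∧ ∀ i : Int, i ∈ fr ↔ (pvInbB rest i && pvAtB vals m i) = true

-- the inner fold over the frontier for one denomination v
lemma pvInnerBFS (rest : Int) (vals : List Int) (hv1 : ∀ v ∈ vals, 1 ≤ v)
    (hnd : vals.Nodup) (m : Int) (_hm : 0 ≤ m) (p : List Int) (v : Int) (s' : List Int)
    (hsplit : vals = p ++ v :: s') (fr : List Int) (hfr : pvFSpec rest vals m fr) :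
    ∀ (r q : List Int), fr = q ++ r →
      ∀ (d : PySem.Dict Int Int) (new : List Int),
      (∀ i : Int, d.get? i =
        if pvDiscB rest vals m p i || pvClaimQB rest vals m v q i
        then some (pvChoice (pvD vals i)) else none) →
      (new.Nodup ∧ ∀ i : Int, i ∈ new ↔
        (pvNewB rest vals m p i || pvClaimQB rest vals m v q i) = true) →
      (∀ i : Int, (r.foldl (fun st j =>
          if j + v ≤ rest ∧ ¬ st.1.contains (j + v) then
            (st.1.insert (j + v) v, st.2 ++ [j + v])
          else st) (d, new)).1.get? i =
        if pvDiscB rest vals m p i || pvClaimQB rest vals m v fr i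
        then some (pvChoice (pvD vals i)) else none) ∧
      ((r.foldl (fun st j =>
          if j + v ≤ rest ∧ ¬ st.1.contains (j + v) then
            (st.1.insert (j + v) v, st.2 ++ [j + v])
          else st) (d, new)).2.Nodup ∧
       ∀ i : Int, i ∈ (r.foldl (fun st j =>
          if j + v ≤ rest ∧ ¬ st.1.contains (j + v) then
            (st.1.insert (j + v) v, st.2 ++ [j + v])
          else st) (d, new)).2 ↔
        (pvNewB rest vals m p i || pvClaimQB rest vals m v fr i) = true) := by
  have hv : v ∈ vals := by rw [hsplit]; simp
  have hv1v : 1 ≤ v := hv1 v hv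
  have hvnotp : v ∉ p := by
    intro hmem
    have hnd' := hnd
    rw [hsplit] at hnd'
    exact List.disjoint_of_nodup_append hnd' hmem List.mem_cons_self
  intro r
  induction r with
  | nil =>
    intro q hqr d new hd hnew
    simp only [List.append_nil] at hqr
    subst hqr
    exact ⟨hd, hnew⟩
  | cons j r' ih =>
    intro q hqr d new hd hnew
    have hjfr : j ∈ fr := by rw [hqr]; simp
    have hjq : j ∉ q := by
      intro hmem
      have hnd' := hfr.1
      rw [hqr] at hnd'
      exact List.disjoint_of_nodup_append hnd' hmem List.mem_cons_self
    obtain ⟨yj, hyj, hyj1⟩ : ∃ yj, pvD vals j = some yj ∧ yj.1 = m := by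
      have := (hfr.2 j).mp hjfr
      simp only [pvInbB, pvAtB, Bool.and_eq_true] at this
      cases hDj : pvD vals j with
      | none => rw [hDj] at this; simp at this
      | some yj =>
        rw [hDj] at this
        exact ⟨yj, rfl, by simpa using this.2⟩
    have hj0 : 0 ≤ j := by
      have := (hfr.2 j).mp hjfr
      simp only [pvInbB, Bool.and_eq_true, decide_eq_true_eq] at this
      exact this.1.1
    have hi1 : 1 ≤ j + v := by omega
    have hvle : v ≤ j + v := by omega
    simp only [List.foldl_cons]
    by_cases hrest : j + v ≤ rest
    · by_cases hcont : d.contains (j + v)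
      · -- already discovered: no change; the fresh claim condition must be false
        have hnostep : (if j + v ≤ rest ∧ ¬ d.contains (j + v) then
            (d.insert (j + v) v, new ++ [j + v]) else (d, new)) = (d, new) := by
          rw [if_neg (by tauto)]
        rw [hnostep]
        have hsome : (d.get? (j + v)).isSome = true := by
          rw [← PySem.Dict.contains_eq_isSome_get?]; exact hcont
        have hcond : (pvDiscB rest vals m p (j + v) ||
            pvClaimQB rest vals m v q (j + v)) = true := by
          by_contra hc
          rw [hd (j + v), if_neg (by simpa using hc)] at hsome
          simp at hsome
        have hQq : pvClaimQB rest vals m v q (j + v) = false := by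
          simp only [pvClaimQB]
          rw [show decide (j + v - v ∈ q) = false by
            simp only [decide_eq_false_iff_not]
            intro hmem
            exact hjq (by simpa using hmem)]
          simp
        have hDisc : pvDiscB rest vals m p (j + v) = true := by
          rcases Bool.or_eq_true_iff.mp hcond with h1 | h2
          · exact h1
          · rw [hQq] at h2; simp at h2
        have hQext : ∀ i2 : Int, pvClaimQB rest vals m v (q ++ [j]) i2 =
            pvClaimQB rest vals m v q i2 := by
          intro i2
          by_cases hij : i2 - v = j
          · have hii : i2 = j + v := by omega
            subst hii
            rw [hQq]
            simp only [pvClaimQB]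
            by_cases hat : pvAtB vals (m + 1) (j + v) = true
            · -- pvD (j+v) has count m+1; Disc must come from a prefix claim ≠ v
              obtain ⟨y, hDy, hy1⟩ : ∃ y, pvD vals (j + v) = some y ∧ y.1 = m + 1 := by
                simp only [pvAtB] at hat
                cases hD : pvD vals (j + v) with
                | none => rw [hD] at hat; simp at hat
                | some y => rw [hD] at hat; exact ⟨y, rfl, by simpa using hat⟩
              have hcb : pvClaimedByB vals m p (j + v) = true := by
                simp only [pvDiscB, pvLowB, hDy, Bool.and_eq_true, Bool.or_eq_true_iff] at hDisc
                rcases hDisc.2 with h1 | h2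
                · simp only [decide_eq_true_eq] at h1; omega
                · exact h2.2
              rw [show decide (vals.find? (pvPredC vals (j + v) (m + 1)) = some v)
                  = false by
                simp only [decide_eq_false_iff_not]
                intro hfind
                simp only [pvClaimedByB, hfind, decide_eq_true_eq] at hcb
                exact hvnotp hcb]
              simp
            · rw [show pvAtB vals (m + 1) (j + v) = false by
                cases hx : pvAtB vals (m + 1) (j + v) with
                | false => rfl
                | true => exact absurd hx hat]
              simp
          · simp only [pvClaimQB]
            rw [show decide (i2 - v ∈ q ++ [j]) = decide (i2 - v ∈ q) from
              decide_eq_decide.mpr (by simp [hij])]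
        refine ih (q ++ [j]) (by rw [hqr]; simp) d new ?_ ?_
        · intro i2
          rw [hQext i2]
          exact hd i2
        · exact ⟨hnew.1, fun i2 => by rw [hQext i2]; exact hnew.2 i2⟩
      · -- fresh discovery: i = j + v enters choice with value v
        have hstep : (if j + v ≤ rest ∧ ¬ d.contains (j + v) then
            (d.insert (j + v) v, new ++ [j + v]) else (d, new)) =
            (d.insert (j + v) v, new ++ [j + v]) := by
          rw [if_pos ⟨hrest, hcont⟩]
        rw [hstep]
        have hnone : d.get? (j + v) = none := by
          have := hcont
          rw [PySem.Dict.contains_eq_isSome_get?] at this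
          cases hx : d.get? (j + v) with
          | none => rfl
          | some z => rw [hx] at this; simp at this
        have hcondf : (pvDiscB rest vals m p (j + v) ||
            pvClaimQB rest vals m v q (j + v)) = false := by
          by_contra hc
          rw [hd (j + v), if_pos (by
            cases hx : (pvDiscB rest vals m p (j + v) ||
              pvClaimQB rest vals m v q (j + v)) with
            | true => rfl
            | false => exact absurd hx hc)] at hnone
          simp at hnone
        have hDiscf : pvDiscB rest vals m p (j + v) = false :=
          (Bool.or_eq_false_iff.mp hcondf).1
        have hQqf : pvClaimQB rest vals m v q (j + v) = false :=
          (Bool.or_eq_false_iff.mp hcondf).2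
        have hsub : pvD vals (j + v - v) = some (m, yj.2) := by
          rw [show j + v - v = j by omega, hyj, show (m, yj.2) = yj from
            Prod.ext hyj1.symm rfl]
        obtain ⟨y, hDy, hyle⟩ := pvD_reach vals hv1 (j + v) hi1 v hv hvle m yj.2 hsub
        have hinb : pvInbB rest (j + v) = true := by
          simp only [pvInbB, Bool.and_eq_true, decide_eq_true_eq]
          omega
        have hlowf : pvLowB vals m (j + v) = false := by
          simp only [pvDiscB, hinb, Bool.true_and, Bool.or_eq_false_iff] at hDiscf
          exact hDiscf.1
        have hy1 : y.1 = m + 1 := by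
          simp only [pvLowB, hDy, decide_eq_false_iff_not] at hlowf
          omega
        have hfind : vals.find? (pvPredC vals (j + v) (m + 1)) = some y.2 := by
          have := pvD_find vals hv1 (j + v) hi1 y hDy
          rwa [hy1] at this
        have hcbf : pvClaimedByB vals m p (j + v) = false := by
          simp only [pvDiscB, hinb, Bool.true_and, Bool.or_eq_false_iff,
            Bool.and_eq_false_iff] at hDiscf
          rcases hDiscf.2 with h1 | h2
          · simp only [pvAtB, hDy, decide_eq_false_iff_not] at h1
            omega
          · exact h2
        have hat : pvAtB vals (m + 1) (j + v) = true := by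
          simp only [pvAtB, hDy, decide_eq_true_eq]
          exact hy1
        have hy2v : y.2 = v := by
          have hy2np : y.2 ∉ p := by
            intro hmem
            simp only [pvClaimedByB, hfind, decide_eq_false_iff_not] at hcbf
            exact hcbf hmem
          have hpredv : pvPredC vals (j + v) (m + 1) v = true := by
            simp only [pvPredC, hsub]
            simp [hvle]
          have hfind2 : (p.find? (pvPredC vals (j + v) (m + 1))).or
              ((v :: s').find? (pvPredC vals (j + v) (m + 1))) = some y.2 := by
            rw [← List.find?_append, ← hsplit]
            exact hfind
          cases hfp : p.find? (pvPredC vals (j + v) (m + 1)) with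
          | some z =>
            rw [hfp] at hfind2
            simp only [Option.some_or] at hfind2
            have hz : z = y.2 := by injection hfind2
            subst hz
            exact absurd (List.mem_of_find?_eq_some hfp) hy2np
          | none =>
            rw [hfp] at hfind2
            simp only [Option.none_or, List.find?_cons, hpredv] at hfind2
            injection hfind2 with hz
            exact hz.symm
        have hchoice : pvChoice (pvD vals (j + v)) = v := by
          rw [hDy]
          simp [pvChoice, hy2v]
        have hfindv : vals.find? (pvPredC vals (j + v) (m + 1)) = some v := by
          rw [hfind, hy2v]
        have hQext : ∀ i2 : Int, i2 ≠ j + v →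
            pvClaimQB rest vals m v (q ++ [j]) i2 = pvClaimQB rest vals m v q i2 := by
          intro i2 hne
          simp only [pvClaimQB]
          rw [show decide (i2 - v ∈ q ++ [j]) = decide (i2 - v ∈ q) from
            decide_eq_decide.mpr (by
              simp only [List.mem_append, List.mem_singleton]
              constructor
              · rintro (h1 | h1)
                · exact h1
                · omega
              · exact Or.inl)]
        have hQnew : pvClaimQB rest vals m v (q ++ [j]) (j + v) = true := by
          simp only [pvClaimQB, hinb, hat, hfindv]
          simp
        have hnotnew : (j + v) ∉ new := by
          intro hmem
          have := (hnew.2 (j + v)).mp hmem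
          rcases Bool.or_eq_true_iff.mp this with h1 | h2
          · simp only [pvNewB, hinb, hat, hcbf] at h1
            simp at h1
          · rw [hQqf] at h2; simp at h2
        refine ih (q ++ [j]) (by rw [hqr]; simp) (d.insert (j + v) v) (new ++ [j + v])
          ?_ ?_
        · intro i2
          rw [PySem.Dict.get?_insert]
          by_cases hii : i2 = j + v
          · subst hii
            rw [if_pos rfl, if_pos (by rw [hQnew]; simp), hchoice]
          · rw [if_neg hii, hQext i2 hii]
            exact hd i2
        · constructor
          · refine List.Nodup.append hnew.1 (List.nodup_singleton _) ?_
            intro a ha hb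
            rw [List.mem_singleton] at hb
            subst hb
            exact hnotnew ha
          · intro i2
            simp only [List.mem_append, List.mem_singleton]
            by_cases hii : i2 = j + v
            · subst hii
              simp only [hnotnew, or_true, true_iff]
              rw [hQnew]
              simp
            · rw [hQext i2 hii]
              simp only [hii, or_false]
              exact hnew.2 i2
    · -- i = j + v exceeds rest: skipped, and it is out of bounds for every predicate
      have hnostep : (if j + v ≤ rest ∧ ¬ d.contains (j + v) then
          (d.insert (j + v) v, new ++ [j + v]) else (d, new)) = (d, new) := by
        rw [if_neg (by tauto)]
      rw [hnostep]
      have hQext : ∀ i2 : Int, pvClaimQB rest vals m v (q ++ [j]) i2 =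
          pvClaimQB rest vals m v q i2 := by
        intro i2
        by_cases hij : i2 - v = j
        · have hii : i2 = j + v := by omega
          subst hii
          simp only [pvClaimQB, pvInbB]
          rw [show decide (j + v ≤ rest) = false by
            simp only [decide_eq_false_iff_not]; omega]
          simp
        · simp only [pvClaimQB]
          rw [show decide (i2 - v ∈ q ++ [j]) = decide (i2 - v ∈ q) from
            decide_eq_decide.mpr (by simp [hij])]
      refine ih (q ++ [j]) (by rw [hqr]; simp) d new ?_ ?_
      · intro i2
        rw [hQext i2]
        exact hd i2
      · exact ⟨hnew.1, fun i2 => by rw [hQext i2]; exact hnew.2 i2⟩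

-- the outer fold over the denominations: one full BFS layer
lemma pvLayer (rest : Int) (vals : List Int) (hv1 : ∀ v ∈ vals, 1 ≤ v)
    (hnd : vals.Nodup) (m : Int) (hm : 0 ≤ m) (d : PySem.Dict Int Int) (fr : List Int)
    (hc : pvCSpec rest vals m d) (hf : pvFSpec rest vals m fr) :
    pvCSpec rest vals (m + 1) (vals.foldl (pvExpand rest fr) (d, ([] : List Int))).1 ∧
    pvFSpec rest vals (m + 1) (vals.foldl (pvExpand rest fr) (d, ([] : List Int))).2 := by
  have houter : ∀ (s p : List Int), vals = p ++ s →
      ∀ (d0 : PySem.Dict Int Int) (new0 : List Int),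
      (∀ i : Int, d0.get? i =
        if pvDiscB rest vals m p i then some (pvChoice (pvD vals i)) else none) →
      (new0.Nodup ∧ ∀ i : Int, i ∈ new0 ↔ pvNewB rest vals m p i = true) →
      (∀ i : Int, (s.foldl (pvExpand rest fr) (d0, new0)).1.get? i =
        if pvDiscB rest vals m (p ++ s) i then some (pvChoice (pvD vals i)) else none) ∧
      ((s.foldl (pvExpand rest fr) (d0, new0)).2.Nodup ∧
       ∀ i : Int, i ∈ (s.foldl (pvExpand rest fr) (d0, new0)).2 ↔
        pvNewB rest vals m (p ++ s) i = true) := by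
    intro s
    induction s with
    | nil =>
      intro p hsplit d0 new0 hd0 hnew0
      simp only [List.foldl_nil, List.append_nil]
      exact ⟨hd0, hnew0⟩
    | cons v s' ih =>
      intro p hsplit d0 new0 hd0 hnew0
      have hv : v ∈ vals := by rw [hsplit]; simp
      have hv1v : 1 ≤ v := hv1 v hv
      have hQnil : ∀ i : Int, pvClaimQB rest vals m v [] i = false := by
        intro i
        simp [pvClaimQB]
      have hinner := pvInnerBFS rest vals hv1 hnd m hm p v s' hsplit fr hf fr [] (by simp)
        d0 new0
        (by intro i; rw [hQnil i, Bool.or_false]; exact hd0 i)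
        ⟨hnew0.1, by intro i; rw [hQnil i, Bool.or_false]; exact hnew0.2 i⟩
      have hconv : ∀ i : Int,
          (pvDiscB rest vals m p i || pvClaimQB rest vals m v fr i) =
            pvDiscB rest vals m (p ++ [v]) i := by
        intro i
        by_cases hinb : pvInbB rest i = true
        · cases hfi : vals.find? (pvPredC vals i (m + 1)) with
          | none => simp [pvDiscB, pvClaimQB, pvClaimedByB, hfi]
          | some z =>
            by_cases hzv : z = v
            · rw [hzv] at hfi
              by_cases hat : pvAtB vals (m + 1) i = true
              · have hmemfr : i - v ∈ fr := by
                  have hpred := List.find?_some hfi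
                  simp only [pvPredC, Bool.and_eq_true, decide_eq_true_eq] at hpred
                  obtain ⟨hvi, hmat⟩ := hpred
                  cases hD : pvD vals (i - v) with
                  | none => rw [hD] at hmat; simp at hmat
                  | some p2 =>
                    rw [hD] at hmat
                    simp only [decide_eq_true_eq] at hmat
                    refine (hf.2 (i - v)).mpr ?_
                    simp only [pvInbB, pvAtB, hD, Bool.and_eq_true, decide_eq_true_eq]
                    simp only [pvInbB, Bool.and_eq_true, decide_eq_true_eq] at hinb
                    exact ⟨⟨by omega, by omega⟩, by omega⟩
                simp [pvDiscB, pvClaimQB, pvClaimedByB, hfi, hat, hinb, hmemfr,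
                  List.mem_append]
              · rw [Bool.not_eq_true] at hat
                simp [pvDiscB, pvClaimQB, pvClaimedByB, hfi, hat, hinb]
            · simp only [pvDiscB, pvClaimQB, pvClaimedByB, hfi]
              rw [show decide ((some z : Option Int) = some v) = false by
                simp only [decide_eq_false_iff_not]
                intro hc
                exact hzv (by injection hc)]
              rw [show decide (z ∈ p ++ [v]) = decide (z ∈ p) from
                decide_eq_decide.mpr (by simp [hzv])]
              simp
        · rw [Bool.not_eq_true] at hinb
          simp [pvDiscB, pvClaimQB, hinb]
      have hconv2 : ∀ i : Int,
          (pvNewB rest vals m p i || pvClaimQB rest vals m v fr i) =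
            pvNewB rest vals m (p ++ [v]) i := by
        intro i
        by_cases hinb : pvInbB rest i = true
        · cases hfi : vals.find? (pvPredC vals i (m + 1)) with
          | none => simp [pvNewB, pvClaimQB, pvClaimedByB, hfi]
          | some z =>
            by_cases hzv : z = v
            · rw [hzv] at hfi
              by_cases hat : pvAtB vals (m + 1) i = true
              · have hmemfr : i - v ∈ fr := by
                  have hpred := List.find?_some hfi
                  simp only [pvPredC, Bool.and_eq_true, decide_eq_true_eq] at hpred
                  obtain ⟨hvi, hmat⟩ := hpred
                  cases hD : pvD vals (i - v) with
                  | none => rw [hD] at hmat; simp at hmat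
                  | some p2 =>
                    rw [hD] at hmat
                    simp only [decide_eq_true_eq] at hmat
                    refine (hf.2 (i - v)).mpr ?_
                    simp only [pvInbB, pvAtB, hD, Bool.and_eq_true, decide_eq_true_eq]
                    simp only [pvInbB, Bool.and_eq_true, decide_eq_true_eq] at hinb
                    exact ⟨⟨by omega, by omega⟩, by omega⟩
                simp [pvNewB, pvClaimQB, pvClaimedByB, hfi, hat, hinb, hmemfr,
                  List.mem_append]
              · rw [Bool.not_eq_true] at hat
                simp [pvNewB, pvClaimQB, pvClaimedByB, hfi, hat, hinb]
            · simp only [pvNewB, pvClaimQB, pvClaimedByB, hfi]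
              rw [show decide ((some z : Option Int) = some v) = false by
                simp only [decide_eq_false_iff_not]
                intro hc
                exact hzv (by injection hc)]
              rw [show decide (z ∈ p ++ [v]) = decide (z ∈ p) from
                decide_eq_decide.mpr (by simp [hzv])]
              simp
        · rw [Bool.not_eq_true] at hinb
          simp [pvNewB, pvClaimQB, hinb]
      rw [List.foldl_cons]
      have hexp : pvExpand rest fr (d0, new0) v = fr.foldl (fun st j =>
          if j + v ≤ rest ∧ ¬ st.1.contains (j + v) then
            (st.1.insert (j + v) v, st.2 ++ [j + v])
          else st) (d0, new0) := rfl
      have hres := ih (p ++ [v]) (by rw [hsplit]; simp)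
        (pvExpand rest fr (d0, new0) v).1 (pvExpand rest fr (d0, new0) v).2
        (by
          intro i
          rw [hexp, ← hconv i]
          exact hinner.1 i)
        (by
          rw [hexp]
          refine ⟨hinner.2.1, ?_⟩
          intro i
          rw [← hconv2 i]
          exact hinner.2.2 i)
      simpa using hres
  have hbase1 : ∀ i : Int, d.get? i =
      if pvDiscB rest vals m [] i then some (pvChoice (pvD vals i)) else none := by
    intro i
    rw [show pvDiscB rest vals m [] i = (pvInbB rest i && pvLowB vals m i) by
      simp [pvDiscB, pvClaimedByB]
      cases vals.find? (pvPredC vals i (m + 1)) <;> simp]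
    exact hc i
  have hbase2 : (([] : List Int)).Nodup ∧ ∀ i : Int, i ∈ ([] : List Int) ↔
      pvNewB rest vals m [] i = true := by
    refine ⟨List.nodup_nil, ?_⟩
    intro i
    simp only [List.not_mem_nil, false_iff]
    rw [show pvNewB rest vals m [] i = false by
      simp [pvNewB, pvClaimedByB]
      cases vals.find? (pvPredC vals i (m + 1)) <;> simp]
    simp
  have hres := houter vals [] (by simp) d [] hbase1 hbase2
  simp only [List.nil_append] at hres
  -- over the full list, "claimed by some prefix element" is implied by "count = m+1"
  have hCBfull : ∀ i : Int, pvInbB rest i = true → pvAtB vals (m + 1) i = true →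
      pvClaimedByB vals m vals i = true := by
    intro i hinb hat
    obtain ⟨y, hDy, hy1⟩ : ∃ y, pvD vals i = some y ∧ y.1 = m + 1 := by
      simp only [pvAtB] at hat
      cases hD : pvD vals i with
      | none => rw [hD] at hat; simp at hat
      | some y => rw [hD] at hat; exact ⟨y, rfl, by simpa using hat⟩
    have hi0 : 0 ≤ i := by
      simp only [pvInbB, Bool.and_eq_true, decide_eq_true_eq] at hinb
      exact hinb.1
    have hi1 : 1 ≤ i := by
      rcases lt_or_ge i 1 with h1 | h1
      · have hieq : i = 0 := by omega
        rw [hieq, pvD_zero] at hDy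
        have : y = (0, 0) := by injection hDy with hx; exact hx.symm
        subst this
        simp at hy1
        omega
      · exact h1
    have hfind := pvD_find vals hv1 i hi1 y hDy
    rw [hy1] at hfind
    simp only [pvClaimedByB, hfind, decide_eq_true_eq]
    exact List.mem_of_find?_eq_some hfind
  have hfin1 : ∀ i : Int, pvDiscB rest vals m vals i =
      (pvInbB rest i && pvLowB vals (m + 1) i) := by
    intro i
    by_cases hinb : pvInbB rest i = true
    · cases hD : pvD vals i with
      | none => simp [pvDiscB, pvLowB, pvAtB, hD, hinb]
      | some y =>
        by_cases hy : y.1 ≤ m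
        · have h1 : pvLowB vals m i = true := by simp [pvLowB, hD, hy]
          have h2 : pvLowB vals (m + 1) i = true := by
            simp only [pvLowB, hD, decide_eq_true_eq]
            omega
          simp [pvDiscB, hinb, h1, h2]
        · by_cases hy2 : y.1 = m + 1
          · have hat : pvAtB vals (m + 1) i = true := by simp [pvAtB, hD, hy2]
            have hcb := hCBfull i hinb hat
            have h2 : pvLowB vals (m + 1) i = true := by
              simp only [pvLowB, hD, decide_eq_true_eq]
              omega
            have h1 : pvLowB vals m i = false := by
              simp only [pvLowB, hD, decide_eq_false_iff_not]
              omega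
            simp [pvDiscB, hinb, h1, h2, hat, hcb]
          · have hat : pvAtB vals (m + 1) i = false := by
              simp only [pvAtB, hD, decide_eq_false_iff_not]
              omega
            have h1 : pvLowB vals m i = false := by
              simp only [pvLowB, hD, decide_eq_false_iff_not]
              omega
            have h2 : pvLowB vals (m + 1) i = false := by
              simp only [pvLowB, hD, decide_eq_false_iff_not]
              omega
            simp [pvDiscB, hinb, h1, h2, hat]
    · rw [Bool.not_eq_true] at hinb
      simp [pvDiscB, hinb]
  have hfin2 : ∀ i : Int, pvNewB rest vals m vals i =
      (pvInbB rest i && pvAtB vals (m + 1) i) := by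
    intro i
    by_cases hinb : pvInbB rest i = true
    · by_cases hat : pvAtB vals (m + 1) i = true
      · simp [pvNewB, hinb, hat, hCBfull i hinb hat]
      · rw [Bool.not_eq_true] at hat
        simp [pvNewB, hinb, hat]
    · rw [Bool.not_eq_true] at hinb
      simp [pvNewB, hinb]
  constructor
  · intro i
    rw [← hfin1 i]
    exact hres.1 i
  · refine ⟨hres.2.1, ?_⟩
    intro i
    rw [← hfin2 i]
    exact hres.2.2 i

def pvFin (rest : Int) (vals : List Int) (d : PySem.Dict Int Int) : Prop :=
  ∀ i : Int, d.get? i =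
    if pvInbB rest i && (pvD vals i).isSome
    then some (pvChoice (pvD vals i)) else none

lemma pvBFS_run (rest : Int) (vals : List Int) (hv1 : ∀ v ∈ vals, 1 ≤ v)
    (hnd : vals.Nodup) :
    ∀ (fuel : Nat) (m : Int) (d : PySem.Dict Int Int) (fr : List Int), 0 ≤ m →
      pvCSpec rest vals m d → pvFSpec rest vals m fr → rest < m + (fuel : Int) →
      pvFin rest vals (pvBFS fuel rest vals d fr) := by
  have hfin_of_bound : ∀ (m : Int) (d : PySem.Dict Int Int), pvCSpec rest vals m d →
      (∀ i : Int, pvInbB rest i = true → ∀ y, pvD vals i = some y → y.1 ≤ m) →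
      pvFin rest vals d := by
    intro m d hc hb i
    rw [hc i]
    by_cases hinb : pvInbB rest i = true
    · cases hD : pvD vals i with
      | none => simp [pvLowB, hD, hinb]
      | some y =>
        have hy := hb i hinb y hD
        simp [pvLowB, hD, hinb, hy]
    · rw [Bool.not_eq_true] at hinb
      simp [hinb]
  intro fuel
  induction fuel with
  | zero =>
    intro m d fr hm hc hf hlt
    refine hfin_of_bound m d hc ?_
    intro i hinb y hD
    simp only [pvInbB, Bool.and_eq_true, decide_eq_true_eq] at hinb
    have hcast : pvD vals ((i.toNat : Nat) : Int) = some y := by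
      rw [show ((i.toNat : Nat) : Int) = i by omega]
      exact hD
    have hb := (pvD_bounds vals hv1 i.toNat y hcast).1
    simp only [Nat.cast_zero] at hlt
    omega
  | succ fuel ih =>
    intro m d fr hm hc hf hlt
    simp only [pvBFS]
    by_cases hfe : fr.isEmpty = true
    · rw [if_pos hfe]
      have hfrnil : fr = [] := List.isEmpty_iff.mp hfe
      refine hfin_of_bound m d hc ?_
      intro i hinb y hD
      by_contra hgt
      rw [not_le] at hgt
      have hinb' := hinb
      simp only [pvInbB, Bool.and_eq_true, decide_eq_true_eq] at hinb'
      have hcast : pvD vals ((i.toNat : Nat) : Int) = some y := by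
        rw [show ((i.toNat : Nat) : Int) = i by omega]
        exact hD
      obtain ⟨m', hm', w, hw⟩ := pvD_descend vals hv1 i.toNat y hcast m hm (le_of_lt hgt)
      have hmem : ((m' : Nat) : Int) ∈ fr := by
        refine (hf.2 _).mpr ?_
        simp only [pvInbB, pvAtB, hw, Bool.and_eq_true, decide_eq_true_eq]
        exact ⟨⟨by omega, by omega⟩, by trivial⟩
      rw [hfrnil] at hmem
      simp at hmem
    · rw [if_neg hfe]
      obtain ⟨hc', hf'⟩ := pvLayer rest vals hv1 hnd m hm d fr hc hf
      exact ih (m + 1) _ _ (by omega) hc' hf' (by push_cast at hlt ⊢; omega)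

-- ============ facts about pvValsB ============

lemma pvValsB_pos (bancnote : List (List (String × Int))) :
    ∀ v ∈ pvValsB bancnote, 1 ≤ v := by
  rw [pvValsB, pvValsFold]
  simp only [List.nil_append]
  generalize PySem.List.sorted bancnote (fun x => pvVal x) true = l
  suffices hgen : ∀ (l : List (List (String × Int))) (vs : List Int),
      ∀ v ∈ pvNewVals l vs, 1 ≤ v from hgen l []
  intro l
  induction l with
  | nil => intro vs v hv; simp [pvNewVals] at hv
  | cons b t ih =>
    intro vs v hv
    simp only [pvNewVals] at hv
    split at hv
    · rcases List.mem_cons.mp hv with h1 | h2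
      · subst h1
        omega
      · exact ih _ v h2
    · exact ih _ v hv

lemma pvValsB_nodup (bancnote : List (List (String × Int))) :
    (pvValsB bancnote).Nodup := by
  rw [pvValsB, pvValsFold]
  simp only [List.nil_append]
  generalize PySem.List.sorted bancnote (fun x => pvVal x) true = l
  suffices hgen : ∀ (l : List (List (String × Int))) (vs : List Int),
      (pvNewVals l vs).Nodup ∧ ∀ v ∈ pvNewVals l vs, v ∉ vs from (hgen l []).1
  intro l
  induction l with
  | nil => intro vs; simp [pvNewVals]
  | cons b t ih =>
    intro vs
    simp only [pvNewVals]
    split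
    case isTrue hcond =>
      obtain ⟨hnd, hnin⟩ := ih (vs ++ [pvVal b])
      refine ⟨List.nodup_cons.mpr ⟨?_, hnd⟩, ?_⟩
      · intro hmem
        have := hnin _ hmem
        simp at this
      · intro v hv
        rcases List.mem_cons.mp hv with h1 | h2
        · subst h1
          exact hcond.2.2
        · intro hvin
          exact hnin v h2 (List.mem_append_left _ hvin)
    case isFalse hcond =>
      obtain ⟨hnd, hnin⟩ := ih vs
      exact ⟨hnd, hnin⟩

-- ============ reconstruction and final assembly ============

lemma pvRecon_eq (folA : List Int) (choice : PySem.Dict Int Int)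
    (h1 : ∀ s : Int, 0 ≤ s → PySem.List.pyGetD folA s 0 = choice.getD s 0)
    (h2 : ∀ s : Int, 1 ≤ s → choice.getD s 0 ≤ s) :
    ∀ (fuel : Nat) (s : Int) (acc : List Int), 0 ≤ s →
      pvReconA fuel folA s acc = pvReconAlt fuel choice s acc := by
  intro fuel
  induction fuel with
  | zero => intro s acc _; rfl
  | succ fuel ih =>
    intro s acc hs0
    simp only [pvReconA, pvReconAlt]
    by_cases hs : 0 < s
    · rw [if_pos hs, if_pos hs, h1 s hs0]
      exact ih _ _ (by have := h2 s (by omega); omega)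
    · rw [if_neg hs, if_neg hs]

-- ===== VERDICT (by name: the statement is the Claim_ definition above) =====
theorem calculeaza_rest_optim_spec : Claim_equal_calculeaza_rest_optim := by
  intro rest bancnote _hDom hPre
  obtain ⟨hrest, hbanc⟩ := hPre
  unfold Spec_calculeaza_rest_optim
  have hv1 := pvValsB_pos bancnote
  have hnd := pvValsB_nodup bancnote
  have houter := pvOuter rest bancnote ⟨hrest, hbanc⟩ rest.toNat (le_refl _)
  rw [show ((rest.toNat : Nat) : Int) + 1 = rest + 1 by omega] at houter
  obtain ⟨hA, hF, hread⟩ := houter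
  have hDPn : pvDPn (pvValsB bancnote) rest.toNat =
      (PySem.List.pyRange 1 (rest + 1) 1).foldl
        (fun dp i => dp ++ [pvBest dp i (pvValsB bancnote)]) [some ((0 : Int), (0 : Int))] := by
    rw [pvDPn, show ((rest.toNat : Nat) : Int) + 1 = rest + 1 by omega]
  have hdp : ∀ j : Int, 0 ≤ j → j ≤ rest →
      PySem.List.pyGetD ((PySem.List.pyRange 1 (rest + 1) 1).foldl
        (fun dp i => dp ++ [pvBest dp i (pvValsB bancnote)]) [some ((0 : Int), (0 : Int))])
        j none = pvD (pvValsB bancnote) j := by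
    intro j hj0 hjr
    rw [← hDPn]
    exact pvD_eq_getD _ rest.toNat j hj0 (by omega)
  have hc0 : pvCSpec rest (pvValsB bancnote) 0 (PySem.Dict.mk [((0 : Int), (0 : Int))]) := by
    intro i
    rw [PySem.Dict.get?_mk_cons]
    by_cases hi : i = 0
    · subst hi
      rw [if_pos (by simp)]
      rw [if_pos (by simp [pvInbB, pvLowB, pvD_zero]; omega)]
      rw [pvD_zero]
      rfl
    · rw [if_neg (by simp; exact fun h => hi h.symm)]
      have hcf : (pvInbB rest i && pvLowB (pvValsB bancnote) 0 i) = false := by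
        by_cases hinb : pvInbB rest i = true
        · have hi1 : 1 ≤ i := by
            simp only [pvInbB, Bool.and_eq_true, decide_eq_true_eq] at hinb
            omega
          cases hD : pvD (pvValsB bancnote) i with
          | none => simp [pvLowB, hD, hinb]
          | some y =>
            have hcast : pvD (pvValsB bancnote) ((i.toNat : Nat) : Int) = some y := by
              rw [show ((i.toNat : Nat) : Int) = i by omega]
              exact hD
            have hbb := (pvD_bounds _ hv1 i.toNat y hcast).2 (by omega)
            simp only [pvLowB, hD, hinb, Bool.true_and, decide_eq_false_iff_not]
            omega
        · rw [Bool.not_eq_true] at hinb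
          simp [hinb]
      rw [hcf]
      simp only [Bool.false_eq_true, if_false]
      rfl
  have hf0 : pvFSpec rest (pvValsB bancnote) 0 [0] := by
    refine ⟨List.nodup_singleton _, ?_⟩
    intro i
    simp only [List.mem_singleton]
    constructor
    · intro hi
      subst hi
      simp [pvInbB, pvAtB, pvD_zero]
      omega
    · intro hcond
      by_contra hi
      simp only [pvInbB, pvAtB, Bool.and_eq_true, decide_eq_true_eq] at hcond
      have hi1 : 1 ≤ i := by omega
      cases hD : pvD (pvValsB bancnote) i with
      | none => rw [hD] at hcond; simp at hcond
      | some y =>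
        rw [hD] at hcond
        have hcast : pvD (pvValsB bancnote) ((i.toNat : Nat) : Int) = some y := by
          rw [show ((i.toNat : Nat) : Int) = i by omega]
          exact hD
        have hbb := (pvD_bounds _ hv1 i.toNat y hcast).2 (by omega)
        simp only [decide_eq_true_eq] at hcond
        omega
  have hfin := pvBFS_run rest (pvValsB bancnote) hv1 hnd (rest.toNat + 2) 0 _ _
    (le_refl 0) hc0 hf0 (by push_cast; omega)
  simp only [calculeaza_rest_optim, calculeaza_rest_optim_alt]
  have hcont : (pvBFS (rest.toNat + 2) rest (pvValsB bancnote)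
      (PySem.Dict.mk [((0 : Int), (0 : Int))]) [0]).contains rest =
      (pvD (pvValsB bancnote) rest).isSome := by
    rw [PySem.Dict.contains_eq_isSome_get?, hfin rest]
    have hinb : pvInbB rest rest = true := by
      simp only [pvInbB, Bool.and_eq_true, decide_eq_true_eq]
      omega
    cases hD : (pvD (pvValsB bancnote) rest).isSome with
    | false =>
      rw [if_neg (by simp [hinb, hD])]
      simp [hD]
    | true =>
      rw [if_pos (by simp [hinb, hD])]
      simp
  have hrA := hread rest hrest (by omega)
  rw [hdp rest hrest (le_refl rest)] at hrA
  cases hD : pvD (pvValsB bancnote) rest with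
  | none =>
    have hdA : PySem.List.pyGetD (((PySem.List.pyRange 1 (rest + 1) 1).foldl
        (fun st i => (PySem.List.sorted bancnote (fun x => pvVal x) true).foldl (pvStepA i) st)
        (PySem.List.pySetD (List.replicate (rest + 1).toNat (none : Option Int)) 0 (some 0),
         List.replicate (rest + 1).toNat 0)).1) rest none = none := by
      rw [hrA.1, hD]
      rfl
    rw [show (pvBFS (rest.toNat + 2) rest (pvValsB bancnote)
        (PySem.Dict.mk [((0 : Int), (0 : Int))]) [0]).contains rest = false from by
      rw [hcont, hD]; rfl, hdA]
    rfl
  | some y =>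
    have hdA : PySem.List.pyGetD (((PySem.List.pyRange 1 (rest + 1) 1).foldl
        (fun st i => (PySem.List.sorted bancnote (fun x => pvVal x) true).foldl (pvStepA i) st)
        (PySem.List.pySetD (List.replicate (rest + 1).toNat (none : Option Int)) 0 (some 0),
         List.replicate (rest + 1).toNat 0)).1) rest none = some y.1 := by
      rw [hrA.1, hD]
      rfl
    rw [show (pvBFS (rest.toNat + 2) rest (pvValsB bancnote)
        (PySem.Dict.mk [((0 : Int), (0 : Int))]) [0]).contains rest = true from by
      rw [hcont, hD]; rfl, hdA]
    have h1 : ∀ s : Int, 0 ≤ s →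
        PySem.List.pyGetD (((PySem.List.pyRange 1 (rest + 1) 1).foldl
          (fun st i => (PySem.List.sorted bancnote (fun x => pvVal x) true).foldl (pvStepA i) st)
          (PySem.List.pySetD (List.replicate (rest + 1).toNat (none : Option Int)) 0 (some 0),
           List.replicate (rest + 1).toNat 0)).2) s 0 =
        (pvBFS (rest.toNat + 2) rest (pvValsB bancnote)
          (PySem.Dict.mk [((0 : Int), (0 : Int))]) [0]).getD s 0 := by
      intro s hs0
      by_cases hsr : s ≤ rest
      · have hrs := (hread s hs0 (by omega)).2
        rw [hdp s hs0 hsr] at hrs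
        rw [hrs, PySem.Dict.getD_eq_get?_getD, hfin s]
        have hinb : pvInbB rest s = true := by
          simp only [pvInbB, Bool.and_eq_true, decide_eq_true_eq]
          omega
        cases hDs : pvD (pvValsB bancnote) s with
        | none =>
          rw [if_neg (by simp [hinb, hDs])]
          rfl
        | some z =>
          rw [if_pos (by simp [hinb])]
          rfl
      · have hout : PySem.List.pyGet? (((PySem.List.pyRange 1 (rest + 1) 1).foldl
            (fun st i => (PySem.List.sorted bancnote (fun x => pvVal x) true).foldl
              (pvStepA i) st)
            (PySem.List.pySetD (List.replicate (rest + 1).toNat (none : Option Int)) 0 (some 0),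
             List.replicate (rest + 1).toNat 0)).2) s = none := by
          rw [PySem.List.pyGet?_eq_none_iff, PySem.Raise.InRange, hF]
          omega
        rw [PySem.List.pyGetD_of_none _ _ _ hout, PySem.Dict.getD_eq_get?_getD, hfin s]
        rw [if_neg (by simp [pvInbB]; omega)]
        rfl
    have h2 : ∀ s : Int, 1 ≤ s →
        (pvBFS (rest.toNat + 2) rest (pvValsB bancnote)
          (PySem.Dict.mk [((0 : Int), (0 : Int))]) [0]).getD s 0 ≤ s := by
      intro s hs1
      rw [PySem.Dict.getD_eq_get?_getD, hfin s]
      by_cases hsr : s ≤ rest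
      · have hinb : pvInbB rest s = true := by
          simp only [pvInbB, Bool.and_eq_true, decide_eq_true_eq]
          omega
        cases hDs : pvD (pvValsB bancnote) s with
        | none =>
          rw [if_neg (by simp [hinb, hDs])]
          simp
          omega
        | some z =>
          rw [if_pos (by simp [hinb])]
          have hcast : pvD (pvValsB bancnote) ((s.toNat : Nat) : Int) = some z := by
            rw [show ((s.toNat : Nat) : Int) = s by omega]
            exact hDs
          have hbb := (pvD_bounds _ hv1 s.toNat z hcast).2 (by omega)
          simp only [Option.getD_some, pvChoice, hDs, Option.map_some]

          omega
      · rw [if_neg (by simp [pvInbB]; omega)]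
        simp
        omega
    have hsol := pvRecon_eq _ _ h1 h2 (rest.toNat + 1) rest [] hrest
    rw [hsol, pvCounts_eq, pvCheckA_eq_all, PySem.Dict.items_counter, List.all_map]
    rfl
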